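-- pv_equiv track=rewrite | github.com/paulklemstine/factor | lean/misc/NumberTheory/IntegerOrbitFactoring/Python/orbit_explorer.py | compute_tree_sizes
-- ===== SOURCE A (Python) =====
-- from typing import List, Tuple, Dict, Set
--
-- def compute_tree_sizes(graph: Dict[int, int], cycles: List[List[int]]) -> Dict[int, int]:
--     """Compute the size of the tree rooted at each cycle node."""
--     cycle_nodes = set()
--     for cycle in cycles:
--         cycle_nodes.update(cycle)
--
--     # Reverse graph
--     reverse = {x: [] for x in graph}
--     for x, y in graph.items():
--         reverse[y].append(x)
--
--     # BFS from cycle nodes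
--     tree_sizes = {}
--     for node in cycle_nodes:
--         size = 0
--         stack = [node]
--         visited = {node}
--         while stack:
--             current = stack.pop()
--             size += 1
--             for pred in reverse[current]:
--                 if pred not in visited and pred not in cycle_nodes:
--                     visited.add(pred)
--                     stack.append(pred)
--         tree_sizes[node] = size
--
--     return tree_sizes
-- ===== SOURCE B (Python) =====
-- def compute_tree_sizes(graph, cycles):
--     """Compute the size of the tree rooted at each cycle node.
--
--     Leaf-peeling with subtree-size accumulation: count in-degrees over the
--     non-cycle part of the forest (edges leaving cycle nodes are not tree
--     edges, so they are removed), then repeatedly process nodes of in-degree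
--     zero, folding each node's accumulated subtree size into its successor;
--     a size reaching a cycle node is added to that root's total."""
--     cycle_nodes = set()
--     for cycle in cycles:
--         cycle_nodes.update(cycle)
--     indeg = {x: 0 for x in graph}
--     for y in graph.values():
--         indeg[y] += 1
--     for r in cycle_nodes:
--         indeg[graph[r]] -= 1
--     size = {x: 1 for x in graph if x not in cycle_nodes}
--     stack = [x for x in size if indeg[x] == 0]
--     tree_sizes = {r: 1 for r in cycle_nodes}
--     while stack:
--         x = stack.pop()
--         y = graph[x]
--         if y in cycle_nodes:
--             tree_sizes[y] += size[x]
--         else: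
--             size[y] += size[x]
--             indeg[y] -= 1
--             if indeg[y] == 0:
--                 stack.append(y)
--     return tree_sizes
-- ===== Notes on version B (the rewrite author's own statement) =====
-- stated objective: alternative
-- what changed: Instead of building a reverse-edge adjacency dict and running one stack-based DFS from each cycle node, B counts in-degrees over the non-cycle part of the forest (removing the out-edges of cycle nodes), then peels nodes of in-degree zero, folding each node's accumulated subtree size into its successor and crediting the cycle root it reaches; Pre_ excludes exactly the inputs on which A raises KeyError (a graph value or a cycle node that is not a graph key), where B raises too.
import Mathlib
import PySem

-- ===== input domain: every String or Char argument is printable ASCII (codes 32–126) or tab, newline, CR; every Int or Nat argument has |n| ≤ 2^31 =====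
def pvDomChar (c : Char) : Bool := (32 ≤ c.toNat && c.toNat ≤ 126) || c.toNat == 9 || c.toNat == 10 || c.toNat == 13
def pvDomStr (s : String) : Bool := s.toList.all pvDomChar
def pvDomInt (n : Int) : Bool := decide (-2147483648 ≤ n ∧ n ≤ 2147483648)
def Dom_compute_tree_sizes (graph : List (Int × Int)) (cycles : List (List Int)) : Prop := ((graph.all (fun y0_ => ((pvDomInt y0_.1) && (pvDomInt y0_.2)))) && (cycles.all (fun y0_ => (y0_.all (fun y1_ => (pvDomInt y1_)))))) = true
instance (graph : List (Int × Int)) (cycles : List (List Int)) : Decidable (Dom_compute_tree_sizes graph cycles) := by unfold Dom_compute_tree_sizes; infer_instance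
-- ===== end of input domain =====

-- B replaces A's reverse-graph construction plus one DFS per cycle node by leaf-peeling over
-- in-degrees with subtree-size accumulation (objective: alternative algorithm, same results).

-- ===== PORT A =====

-- cycle_nodes = set(); for cycle in cycles: cycle_nodes.update(cycle)
-- (shared by both Pythons verbatim, so shared by both ports)
def pvCycleSet (cycles : List (List Int)) : PySem.Set Int :=
  cycles.foldl (fun s c => PySem.Set.update s c) PySem.Set.empty

-- reverse = {x: [] for x in graph}
def pvRev0 (g : PySem.Dict Int Int) : PySem.Dict Int (List Int) :=
  g.keys.foldl (fun d x => d.insert x ([] : List Int)) PySem.Dict.empty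

-- for x, y in graph.items(): reverse[y].append(x)
-- ('modify y [] (· ++ [x])' is the total form of 'reverse[y].append(x)'; under Pre_ every y is
-- already a key of reverse, so the default [] is never used and it is exact)
def pvRev (g : PySem.Dict Int Int) : PySem.Dict Int (List Int) :=
  g.items.foldl (fun d xy => d.modify xy.2 [] (· ++ [xy.1])) (pvRev0 g)

-- the 'while stack:' loop of A; state (stack, visited, size).  The stack keeps Python's list
-- REVERSED (head = top), so 'stack.pop()' is head-pop and appending the preds in iteration
-- order is the foldl prepend below (last-appended pred = head = next popped, Python's LIFO).
-- fuel: each iteration pops once, and every push marks a previously unvisited graph key, so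
-- 2*|keys| + 1 iterations always suffice; the fuel is never exhausted (proved below).
def pvDfsA (rev : PySem.Dict Int (List Int)) (cyc : PySem.Set Int) :
    Nat → List Int → PySem.Set Int → Int → Int × PySem.Set Int
  | 0, _, vis, size => (size, vis)
  | _ + 1, [], vis, size => (size, vis)
  | fuel + 1, current :: rest, vis, size =>
    let sv := (rev.getD current []).foldl
      (fun (sv : List Int × PySem.Set Int) p =>
        if !sv.2.contains p && !cyc.contains p then (p :: sv.1, PySem.Set.add sv.2 p) else sv)
      (rest, vis)
    pvDfsA rev cyc fuel sv.1 sv.2 (size + 1)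

def compute_tree_sizes (graph : List (Int × Int)) (cycles : List (List Int)) : List (Int × Int) :=
  let g := PySem.Dict.ofList graph
  let cyc := pvCycleSet cycles
  let rev := pvRev g
  -- for node in cycle_nodes: … ; tree_sizes[node] = size   (size = DFS with stack=[node], visited={node})
  let ts := cyc.foldl
    (fun ts node => ts.insert node (pvDfsA rev cyc (2 * g.size + 1) [node] (PySem.Set.ofList [node]) 0).1)
    PySem.Dict.empty
  ts.items

-- ===== PORT B =====

-- indeg = {x: 0 for x in graph}
def pvIndeg0 (g : PySem.Dict Int Int) : PySem.Dict Int Int :=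
  g.keys.foldl (fun d x => d.insert x (0 : Int)) PySem.Dict.empty

-- for y in graph.values(): indeg[y] += 1
-- ('modify y 0 (· + 1)' is the total form of 'indeg[y] += 1'; under Pre_ every value y is a
-- graph key, hence a key of indeg, so the default 0 is never used and it is exact)
def pvIndeg1 (g : PySem.Dict Int Int) : PySem.Dict Int Int :=
  g.values.foldl (fun d y => d.modify y 0 (· + 1)) (pvIndeg0 g)

-- for r in cycle_nodes: indeg[graph[r]] -= 1
-- ('g.getD r 0' is the total form of 'graph[r]': under Pre_ every cycle node is a graph key;
-- its value is then a key of indeg, so 'modify … 0' is exact as above)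
def pvIndeg (g : PySem.Dict Int Int) (cyc : PySem.Set Int) : PySem.Dict Int Int :=
  cyc.foldl (fun d r => d.modify (g.getD r 0) 0 (· - 1)) (pvIndeg1 g)

-- size = {x: 1 for x in graph if x not in cycle_nodes}
def pvSize0 (g : PySem.Dict Int Int) (cyc : PySem.Set Int) : PySem.Dict Int Int :=
  g.keys.foldl (fun d x => if cyc.contains x then d else d.insert x (1 : Int)) PySem.Dict.empty

-- the 'while stack:' loop of B; state (stack, size, indeg, tree_sizes).  The stack keeps
-- Python's list REVERSED (head = top): 'stack.pop()' is head-pop, 'stack.append(y)' is cons.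
-- 'ts.modify y 0 (· + …)' / 'size.modify y 0 (· + …)' are the total forms of
-- 'tree_sizes[y] += size[x]' / 'size[y] += size[x]' (y is a key of the dict in each branch).
-- fuel: each iteration pops once and every push marks a node of in-degree newly zero, so
-- 2*|keys| + 1 iterations always suffice; the fuel is never exhausted (proved below).
def pvLoopB (g : PySem.Dict Int Int) (cyc : PySem.Set Int) :
    Nat → List Int → PySem.Dict Int Int → PySem.Dict Int Int → PySem.Dict Int Int →
    PySem.Dict Int Int
  | 0, _, _, _, ts => ts
  | _ + 1, [], _, _, ts => ts
  | fuel + 1, x :: rest, size, indeg, ts =>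
    let y := g.getD x 0
    if cyc.contains y then
      pvLoopB g cyc fuel rest size indeg (ts.modify y 0 (· + size.getD x 0))
    else
      let size' := size.modify y 0 (· + size.getD x 0)
      let indeg' := indeg.modify y 0 (· - 1)
      if indeg'.getD y 0 == 0 then pvLoopB g cyc fuel (y :: rest) size' indeg' ts
      else pvLoopB g cyc fuel rest size' indeg' ts

def compute_tree_sizes_alt (graph : List (Int × Int)) (cycles : List (List Int)) : List (Int × Int) :=
  let g := PySem.Dict.ofList graph
  let cyc := pvCycleSet cycles
  let indeg := pvIndeg g cyc
  let size := pvSize0 g cyc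
  -- stack = [x for x in size if indeg[x] == 0]   (kept reversed: head = top of Python's stack)
  let stack := (size.keys.filter (fun x => indeg.getD x 0 == 0)).reverse
  -- tree_sizes = {r: 1 for r in cycle_nodes}
  let ts := cyc.foldl (fun d r => d.insert r (1 : Int)) PySem.Dict.empty
  (pvLoopB g cyc (2 * g.size + 1) stack size indeg ts).items

-- ===== PRECONDITION & SPEC =====

-- Pre_ excludes exactly the inputs on which A raises KeyError: a value of the graph dict that is
-- not a graph key (reverse[y].append) or a cycle node that is not a graph key (reverse[node]).
def Pre_compute_tree_sizes (graph : List (Int × Int)) (cycles : List (List Int)) : Prop :=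
  ((PySem.Dict.ofList graph).values.all (fun y => (PySem.Dict.ofList graph).contains y)
    && cycles.all (fun c => c.all (fun v => (PySem.Dict.ofList graph).contains v))) = true
instance (graph : List (Int × Int)) (cycles : List (List Int)) : Decidable (Pre_compute_tree_sizes graph cycles) := by
  unfold Pre_compute_tree_sizes; infer_instance

def pvWitness_compute_tree_sizes : (List (Int × Int)) × List (List Int) := ([(1, 1), (2, 1)], [[1]])

def Spec_compute_tree_sizes (graph : List (Int × Int)) (cycles : List (List Int)) (out : List (Int × Int)) : Prop := out = compute_tree_sizes_alt graph cycles
instance (graph : List (Int × Int)) (cycles : List (List Int)) (out : List (Int × Int)) : Decidable (Spec_compute_tree_sizes graph cycles out) := by unfold Spec_compute_tree_sizes; infer_instance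

-- ===== CLAIM (what is proved, stated in full; the proofs are below) =====
def Claim_equal_compute_tree_sizes : Prop := ∀ (graph : List (Int × Int)) (cycles : List (List Int)), Dom_compute_tree_sizes graph cycles → Pre_compute_tree_sizes graph cycles → Spec_compute_tree_sizes graph cycles (compute_tree_sizes graph cycles)



-- ===== LEMMAS AND PROOFS =====

-- ---- shared: forward-walk specification functions (proof-side only) ----

-- follow successors for at most m steps, stopping at the first cycle node; none = not reached
def pvWalkN (g : PySem.Dict Int Int) (cyc : PySem.Set Int) : Nat → Int → Option Int
  | 0, x => if cyc.contains x then some x else none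
  | m + 1, x => if cyc.contains x then some x else (g.get? x).bind (pvWalkN g cyc m)

-- bounded forward walk returning the node where it stops (total)
def pvWalkB (g : PySem.Dict Int Int) (cyc : PySem.Set Int) : Nat → Int → Int
  | 0, cur => cur
  | k + 1, cur => if cyc.contains cur then cur else pvWalkB g cyc k (g.getD cur 0)

lemma pvWalkN_succ_of_some {g : PySem.Dict Int Int} {cyc : PySem.Set Int} :
    ∀ {m : Nat} {x r : Int}, pvWalkN g cyc m x = some r → pvWalkN g cyc (m + 1) x = some r := by
  intro m
  induction m with
  | zero =>
    intro x r h
    simp only [pvWalkN] at h ⊢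
    by_cases hc : cyc.contains x = true
    · rwa [if_pos hc] at h ⊢
    · rw [if_neg hc] at h; exact absurd h (by simp)
  | succ m ih =>
    intro x r h
    simp only [pvWalkN] at h ⊢
    by_cases hc : cyc.contains x = true
    · rwa [if_pos hc] at h ⊢
    · rw [if_neg hc] at h ⊢
      rcases Option.bind_eq_some_iff.mp h with ⟨y, hy, hw⟩
      exact Option.bind_eq_some_iff.mpr ⟨y, hy, ih hw⟩

lemma pvWalkN_mono {g : PySem.Dict Int Int} {cyc : PySem.Set Int} {m m' : Nat} {x r : Int}
    (hle : m ≤ m') (h : pvWalkN g cyc m x = some r) : pvWalkN g cyc m' x = some r := by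
  induction m' with
  | zero => exact (Nat.le_zero.mp hle) ▸ h
  | succ m' ih =>
    rcases Nat.lt_or_ge m (m' + 1) with hlt | hge
    · exact pvWalkN_succ_of_some (ih (Nat.lt_succ_iff.mp hlt))
    · exact (Nat.le_antisymm hle hge) ▸ h

lemma pvWalkB_of_pvWalkN {g : PySem.Dict Int Int} {cyc : PySem.Set Int} :
    ∀ {m k : Nat} {x r : Int}, pvWalkN g cyc m x = some r → m < k → pvWalkB g cyc k x = r := by
  intro m
  induction m with
  | zero =>
    intro k x r h hk
    obtain ⟨k', rfl⟩ : ∃ k', k = k' + 1 := ⟨k - 1, by omega⟩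
    simp only [pvWalkN] at h
    by_cases hc : cyc.contains x = true
    · rw [if_pos hc] at h
      simp only [pvWalkB, if_pos hc]
      exact Option.some.inj h
    · rw [if_neg hc] at h; exact absurd h (by simp)
  | succ m ih =>
    intro k x r h hk
    obtain ⟨k', rfl⟩ : ∃ k', k = k' + 1 := ⟨k - 1, by omega⟩
    simp only [pvWalkN] at h
    by_cases hc : cyc.contains x = true
    · rw [if_pos hc] at h
      simp only [pvWalkB, if_pos hc]
      exact Option.some.inj h
    · rw [if_neg hc] at h
      rcases Option.bind_eq_some_iff.mp h with ⟨y, hy, hw⟩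
      simp only [pvWalkB, if_neg hc]
      rw [PySem.Dict.getD_of_get?_eq_some g 0 hy]
      exact ih hw (by omega)

lemma pvWalkN_of_pvWalkB {g : PySem.Dict Int Int} {cyc : PySem.Set Int}
    (Hval : ∀ x y : Int, g.get? x = some y → g.contains y = true) :
    ∀ {k : Nat} {x : Int}, g.contains x = true → cyc.contains (pvWalkB g cyc k x) = true →
      pvWalkN g cyc k x = some (pvWalkB g cyc k x) := by
  intro k
  induction k with
  | zero =>
    intro x _ hc
    simp only [pvWalkB] at hc ⊢
    simp only [pvWalkN, if_pos hc]
  | succ k ih =>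
    intro x hx hc
    by_cases hcx : cyc.contains x = true
    · simp only [pvWalkB, if_pos hcx] at hc ⊢
      simp only [pvWalkN, if_pos hcx]
    · simp only [pvWalkB, if_neg hcx] at hc ⊢
      obtain ⟨y, hy⟩ : ∃ y, g.get? x = some y := by
        have hx' := (PySem.Dict.contains_eq_isSome_get? g x) ▸ hx
        cases hgy : g.get? x with
        | none => rw [hgy] at hx'; exact absurd hx' (by simp)
        | some y => exact ⟨y, rfl⟩
      rw [PySem.Dict.getD_of_get?_eq_some g 0 hy] at hc ⊢
      simp only [pvWalkN, if_neg hcx, hy, Option.bind_some]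
      exact ih (Hval x y hy) hc

lemma pvCycleSet_mem_aux (cycles : List (List Int)) :
    ∀ (s : PySem.Set Int) (x : Int),
      x ∈ cycles.foldl (fun s c => PySem.Set.update s c) s ↔ x ∈ s ∨ ∃ c ∈ cycles, x ∈ c := by
  induction cycles with
  | nil => intro s x; simp
  | cons c cs ih =>
    intro s x
    simp only [List.foldl_cons, ih, PySem.Set.mem_update, List.mem_cons]
    constructor
    · rintro ((h | h) | ⟨c', hc', hx⟩)
      · exact Or.inl h
      · exact Or.inr ⟨c, Or.inl rfl, h⟩
      · exact Or.inr ⟨c', Or.inr hc', hx⟩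
    · rintro (h | ⟨c', (rfl | hc'), hx⟩)
      · exact Or.inl (Or.inl h)
      · exact Or.inl (Or.inr hx)
      · exact Or.inr ⟨c', hc', hx⟩

lemma pvCycleSet_mem (cycles : List (List Int)) (x : Int) :
    x ∈ pvCycleSet cycles ↔ ∃ c ∈ cycles, x ∈ c := by
  unfold pvCycleSet
  rw [pvCycleSet_mem_aux]
  simp [PySem.Set.empty]

lemma pvCycleSet_nodup (cycles : List (List Int)) : (pvCycleSet cycles).Nodup := by
  unfold pvCycleSet
  have : ∀ (s : PySem.Set Int), s.Nodup → (cycles.foldl (fun s c => PySem.Set.update s c) s).Nodup := by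
    induction cycles with
    | nil => intro s hs; exact hs
    | cons c cs ih => intro s hs; exact ih _ (PySem.Set.nodup_update s c hs)
  exact this _ List.nodup_nil

-- ---- A-side: characterising the DFS count ----

lemma pvRev0_getD (g : PySem.Dict Int Int) (v : Int) : (pvRev0 g).getD v [] = [] := by
  unfold pvRev0
  have : ∀ (l : List Int) (d : PySem.Dict Int (List Int)), d.getD v [] = [] →
      (l.foldl (fun d x => d.insert x ([] : List Int)) d).getD v [] = [] := by
    intro l
    induction l with
    | nil => intro d h; exact h
    | cons x xs ih =>
      intro d h
      refine ih _ ?_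
      rw [PySem.Dict.getD_insert]
      split <;> simp [h]
  exact this _ _ (by simp [pysem])

lemma pvRev_getD (g : PySem.Dict Int Int) (v : Int) :
    (pvRev g).getD v [] = (g.items.filter (fun xy => xy.2 == v)).map (fun xy => xy.1) := by
  unfold pvRev
  have hswap : g.items.foldl (fun d xy => d.modify xy.2 [] (· ++ [xy.1])) (pvRev0 g)
      = (g.items.map (fun xy => (xy.2, xy.1))).foldl (fun d p => d.modify p.1 [] (· ++ [p.2])) (pvRev0 g) := by
    rw [List.foldl_map]
  rw [hswap, PySem.Dict.getD_foldl_modify_append, pvRev0_getD]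
  simp [List.filter_map, Function.comp_def]

lemma pvMem_rev_getD (g : PySem.Dict Int Int) (hk : g.keys.Nodup) (v p : Int) :
    p ∈ (pvRev g).getD v [] ↔ g.get? p = some v := by
  rw [pvRev_getD, PySem.Dict.get?_eq_some_iff_mem_items g p v hk]
  simp only [List.mem_map, List.mem_filter]
  constructor
  · rintro ⟨⟨a, b⟩, ⟨hab, hbv⟩, rfl⟩
    simp only [beq_iff_eq] at hbv
    exact hbv ▸ hab
  · intro h
    exact ⟨(p, v), ⟨h, by simp⟩, rfl⟩

lemma pvFilter_drop (keys vis : List Int) (p : Int) (hp : p ∈ keys) (hnp : p ∉ vis) :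
    (keys.filter (fun x => decide (x ∉ vis ++ [p]))).length + 1
      ≤ (keys.filter (fun x => decide (x ∉ vis))).length := by
  have hsub : ∀ x : Int, decide (x ∉ vis ++ [p]) = (decide (x ≠ p) && decide (x ∉ vis)) := by
    intro x; by_cases h1 : x ∈ vis <;> by_cases h2 : x = p <;> simp [h1, h2]
  have : keys.filter (fun x => decide (x ∉ vis ++ [p]))
      = (keys.filter (fun x => decide (x ∉ vis))).filter (fun x => decide (x ≠ p)) := by
    rw [List.filter_filter]
    exact List.filter_congr (fun x _ => hsub x)
  rw [this]
  have hlt : ((keys.filter (fun x => decide (x ∉ vis))).filter (fun x => decide (x ≠ p))).length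
      < (keys.filter (fun x => decide (x ∉ vis))).length := by
    rw [List.length_filter_lt_length_iff_exists]
    exact ⟨p, List.mem_filter.mpr ⟨hp, by simp [hnp]⟩, by simp⟩
  omega

-- invariant of A's DFS visited set, relative to the root rt of the current tree
def pvInv (g : PySem.Dict Int Int) (cyc : PySem.Set Int) (rt : Int) (vis : PySem.Set Int) : Prop :=
  vis.Nodup ∧
  (∀ x ∈ vis, x = rt ∨ (g.contains x = true ∧ cyc.contains x = false)) ∧
  (∀ x ∈ vis, pvWalkN g cyc (vis.length - 1) x = some rt)

lemma pvInner (g : PySem.Dict Int Int) (cyc : PySem.Set Int) (rt current : Int) :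
    ∀ (P : List Int) (st : List Int) (vis : PySem.Set Int),
    (∀ p ∈ P, g.get? p = some current ∧ p ∈ g.keys) →
    current ∈ vis → pvInv g cyc rt vis →
    ∃ ps : List Int,
      P.foldl (fun (sv : List Int × PySem.Set Int) p =>
          if !sv.2.contains p && !cyc.contains p then (p :: sv.1, PySem.Set.add sv.2 p) else sv)
        (st, vis) = (ps.reverse ++ st, vis ++ ps)
      ∧ (∀ p ∈ ps, p ∉ vis)
      ∧ (∀ p ∈ P, cyc.contains p = false → p ∈ vis ++ ps)
      ∧ pvInv g cyc rt (vis ++ ps)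
      ∧ 2 * (g.keys.filter (fun x => decide (x ∉ vis ++ ps))).length + ps.length
          ≤ 2 * (g.keys.filter (fun x => decide (x ∉ vis))).length := by
  intro P
  induction P with
  | nil =>
    intro st vis _ _ hinv
    exact ⟨[], by simp, by simp, by simp, by simpa using hinv, by simp⟩
  | cons p P' ih =>
    intro st vis hP hcur hinv
    obtain ⟨hnd, hshape, hwalk⟩ := hinv
    simp only [List.foldl_cons]
    cases hcond : (!PySem.Set.contains vis p && !cyc.contains p) with
    | false =>
      rw [if_neg (by simp : ¬ ((false : Bool) = true))]
      obtain ⟨ps, heq, hnew, hcov, hinv', hmeas⟩ :=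
        ih st vis (fun q hq => hP q (List.mem_cons_of_mem _ hq)) hcur ⟨hnd, hshape, hwalk⟩
      refine ⟨ps, heq, hnew, ?_, hinv', hmeas⟩
      intro q hq hqc
      rcases List.mem_cons.mp hq with rfl | hq'
      · have : PySem.Set.contains vis q = true := by
          have hcond' := hcond
          simp only [Bool.and_eq_false_iff] at hcond'
          rcases hcond' with h | h
          · cases hv : PySem.Set.contains vis q with
            | true => rfl
            | false => rw [hv] at h; simp at h
          · rw [hqc] at h; simp at h
        exact List.mem_append_left _ ((PySem.Set.contains_iff vis q).mp this)
      · exact hcov q hq' hqc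
    | true =>
      rw [if_pos (rfl : (true : Bool) = true)]
      have hcond' := hcond
      simp only [Bool.and_eq_true] at hcond'
      obtain ⟨h1, h2⟩ := hcond'
      have hpv : p ∉ vis := by
        intro hmem
        rw [(PySem.Set.contains_iff vis p).mpr hmem] at h1; simp at h1
      have hpc : cyc.contains p = false := by
        cases h : cyc.contains p
        · rfl
        · rw [h] at h2; simp at h2
      have hadd : PySem.Set.add vis p = vis ++ [p] := PySem.Set.add_of_not_mem hpv
      rw [hadd]
      have hvisne : 1 ≤ vis.length := List.length_pos_of_mem hcur
      have hinv1 : pvInv g cyc rt (vis ++ [p]) := by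
        refine ⟨?_, ?_, ?_⟩
        · refine List.Nodup.append hnd (by simp) ?_
          intro a ha hb
          rcases List.mem_singleton.mp hb with rfl
          exact hpv ha
        · intro x hx
          rcases List.mem_append.mp hx with hx | hx
          · exact hshape x hx
          · rcases List.mem_singleton.mp hx with rfl
            refine Or.inr ⟨?_, hpc⟩
            exact (PySem.Dict.contains_iff_mem_keys g x).mpr (hP x (by simp)).2
        · intro x hx
          have hlen : (vis ++ [p]).length - 1 = vis.length := by
            simp only [List.length_append, List.length_singleton]; omega
          rw [hlen]
          rcases List.mem_append.mp hx with hx | hx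
          · exact pvWalkN_mono (by omega) (hwalk x hx)
          · rcases List.mem_singleton.mp hx with rfl
            obtain ⟨hget, _⟩ := hP x (by simp)
            obtain ⟨L', hL⟩ : ∃ L', vis.length = L' + 1 := ⟨vis.length - 1, by omega⟩
            rw [hL]
            have hcond2 : ¬ (cyc.contains x = true) := by rw [hpc]; exact Bool.false_ne_true
            simp only [pvWalkN, if_neg hcond2, hget, Option.bind_some]
            have := hwalk current hcur
            exact pvWalkN_mono (by omega) this
      obtain ⟨ps', heq, hnew, hcov, hinv', hmeas⟩ :=
        ih (p :: st) (vis ++ [p]) (fun q hq => hP q (List.mem_cons_of_mem _ hq))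
          (List.mem_append_left _ hcur) hinv1
      have hassoc : vis ++ [p] ++ ps' = vis ++ (p :: ps') := by simp
      refine ⟨p :: ps', ?_, ?_, ?_, ?_, ?_⟩
      · rw [heq, hassoc]; simp
      · intro q hq
        rcases List.mem_cons.mp hq with rfl | hq'
        · exact hpv
        · intro hmem
          exact hnew q hq' (List.mem_append_left _ hmem)
      · intro q hq hqc
        rcases List.mem_cons.mp hq with rfl | hq'
        · rw [← hassoc]; exact List.mem_append_left _ (List.mem_append_right _ (by simp))
        · rw [← hassoc]; exact hcov q hq' hqc
      · rwa [← hassoc]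
      · have hdrop := pvFilter_drop g.keys vis p (hP p (by simp)).2 hpv
        rw [← hassoc]
        have : (p :: ps').length = ps'.length + 1 := by simp
        omega

lemma pvDfs_main (g : PySem.Dict Int Int) (cyc : PySem.Set Int) (rt : Int) (hk : g.keys.Nodup) :
    ∀ (fuel : Nat) (stack : List Int) (vis : PySem.Set Int) (size : Int),
    2 * (g.keys.filter (fun x => decide (x ∉ vis))).length + stack.length ≤ fuel →
    stack.Nodup → (∀ x ∈ stack, x ∈ vis) →
    pvInv g cyc rt vis →
    (∀ v ∈ vis, v ∈ stack ∨ ∀ p, cyc.contains p = false → g.get? p = some v → p ∈ vis) →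
    ∃ ps : List Int,
      pvDfsA (pvRev g) cyc fuel stack vis size
        = (size + ((stack.length + ps.length : Nat) : Int), vis ++ ps)
      ∧ pvInv g cyc rt (vis ++ ps)
      ∧ (∀ v ∈ vis ++ ps, ∀ p, cyc.contains p = false → g.get? p = some v → p ∈ vis ++ ps) := by
  intro fuel
  induction fuel with
  | zero =>
    intro stack vis size hmeas _ _ hinv hcl
    have hstack : stack = [] := List.length_eq_zero_iff.mp (by omega)
    subst hstack
    refine ⟨[], by simp [pvDfsA], by simpa using hinv, ?_⟩
    intro v hv p hpc hpg
    simp only [List.append_nil] at hv ⊢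
    rcases hcl v hv with h | h
    · exact absurd h (List.not_mem_nil)
    · exact h p hpc hpg
  | succ fuel ih =>
    intro stack vis size hmeas hsnd hst hinv hcl
    cases stack with
    | nil =>
      refine ⟨[], by simp [pvDfsA], by simpa using hinv, ?_⟩
      intro v hv p hpc hpg
      simp only [List.append_nil] at hv ⊢
      rcases hcl v hv with h | h
      · exact absurd h (List.not_mem_nil)
      · exact h p hpc hpg
    | cons current rest =>
      have hPmem : ∀ p ∈ (pvRev g).getD current [], g.get? p = some current ∧ p ∈ g.keys := by
        intro p hp
        have hg := (pvMem_rev_getD g hk current p).mp hp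
        refine ⟨hg, (PySem.Dict.contains_iff_mem_keys g p).mp ?_⟩
        rw [PySem.Dict.contains_eq_isSome_get?, hg]; rfl
      have hcurv : current ∈ vis := hst current (List.mem_cons_self)
      obtain ⟨ps₁, heq, hnew, hcov, hinv1, hmeas1⟩ :=
        pvInner g cyc rt current ((pvRev g).getD current []) rest vis hPmem hcurv hinv
      obtain ⟨hnd1, hshape1, hwalk1⟩ := hinv1
      have hps₁nd : ps₁.Nodup := (List.nodup_append.mp hnd1).2.1
      have hrestnd : rest.Nodup := (List.nodup_cons.mp hsnd).2
      have hcrest : current ∉ rest := (List.nodup_cons.mp hsnd).1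
      have hst' : ∀ x ∈ ps₁.reverse ++ rest, x ∈ vis ++ ps₁ := by
        intro x hx
        rcases List.mem_append.mp hx with hx | hx
        · exact List.mem_append_right _ (List.mem_reverse.mp hx)
        · exact List.mem_append_left _ (hst x (List.mem_cons_of_mem _ hx))
      have hsnd' : (ps₁.reverse ++ rest).Nodup := by
        refine List.Nodup.append (List.nodup_reverse.mpr hps₁nd) hrestnd ?_
        intro a ha hb
        exact hnew a (List.mem_reverse.mp ha) (hst a (List.mem_cons_of_mem _ hb))
      have hcl' : ∀ v ∈ vis ++ ps₁, v ∈ ps₁.reverse ++ rest ∨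
          ∀ p, cyc.contains p = false → g.get? p = some v → p ∈ vis ++ ps₁ := by
        intro v hv
        rcases List.mem_append.mp hv with hv | hv
        · rcases hcl v hv with h | h
          · rcases List.mem_cons.mp h with rfl | h'
            · refine Or.inr ?_
              intro p hpc hpg
              exact hcov p ((pvMem_rev_getD g hk v p).mpr hpg) hpc
            · exact Or.inl (List.mem_append_right _ h')
          · exact Or.inr fun p hpc hpg => List.mem_append_left _ (h p hpc hpg)
        · exact Or.inl (List.mem_append_left _ (List.mem_reverse.mpr hv))
      have hmeas' : 2 * (g.keys.filter (fun x => decide (x ∉ vis ++ ps₁))).length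
          + (ps₁.reverse ++ rest).length ≤ fuel := by
        have h1 : (ps₁.reverse ++ rest).length = ps₁.length + rest.length := by
          simp [List.length_append, List.length_reverse]
        have h2 : (current :: rest).length = rest.length + 1 := by simp
        rw [h2] at hmeas
        omega
      obtain ⟨ps₂, heq2, hinv2, hcl2⟩ :=
        ih (ps₁.reverse ++ rest) (vis ++ ps₁) (size + 1) hmeas' hsnd' hst' ⟨hnd1, hshape1, hwalk1⟩ hcl'
      refine ⟨ps₁ ++ ps₂, ?_, ?_, ?_⟩
      · show pvDfsA (pvRev g) cyc (fuel + 1) (current :: rest) vis size = _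
        simp only [pvDfsA]
        rw [heq, heq2]
        refine Prod.ext ?_ (by simp)
        show size + 1 + (((ps₁.reverse ++ rest).length + ps₂.length : Nat) : Int)
            = size + (((current :: rest).length + (ps₁ ++ ps₂).length : Nat) : Int)
        have h1 : (ps₁.reverse ++ rest).length = ps₁.length + rest.length := by
          simp [List.length_append, List.length_reverse]
        have h2 : (current :: rest).length = rest.length + 1 := by simp
        have h3 : (ps₁ ++ ps₂).length = ps₁.length + ps₂.length := by simp
        rw [h1, h2, h3]
        push_cast
        ring
      · rwa [← List.append_assoc]
      · rw [← List.append_assoc]; exact hcl2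

lemma pvReach_mem (g : PySem.Dict Int Int) (cyc : PySem.Set Int) (rt : Int) (F : List Int)
    (hrtF : rt ∈ F)
    (hcl : ∀ v ∈ F, ∀ p, cyc.contains p = false → g.get? p = some v → p ∈ F) :
    ∀ (m : Nat) (x : Int), pvWalkN g cyc m x = some rt → x ∈ F := by
  intro m
  induction m with
  | zero =>
    intro x h
    simp only [pvWalkN] at h
    by_cases hc : cyc.contains x = true
    · rw [if_pos hc] at h; exact (Option.some.inj h) ▸ hrtF
    · rw [if_neg hc] at h; exact absurd h (by simp)
  | succ m ih =>
    intro x h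
    simp only [pvWalkN] at h
    by_cases hc : cyc.contains x = true
    · rw [if_pos hc] at h; exact (Option.some.inj h) ▸ hrtF
    · rw [if_neg hc] at h
      rcases Option.bind_eq_some_iff.mp h with ⟨y, hy, hw⟩
      have hpc : cyc.contains x = false := by
        cases hcc : cyc.contains x
        · rfl
        · exact absurd hcc hc
      exact hcl y (ih y hw) x hpc hy

lemma pvSize_eq (g : PySem.Dict Int Int) (cyc : PySem.Set Int) (rt : Int)
    (hk : g.keys.Nodup)
    (Hval : ∀ x y : Int, g.get? x = some y → g.contains y = true)
    (hrtk : g.contains rt = true) (hrtc : cyc.contains rt = true) :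
    (pvDfsA (pvRev g) cyc (2 * g.size + 1) [rt] (PySem.Set.ofList [rt]) 0).1
      = 1 + ((g.keys.countP (fun x => !cyc.contains x &&
          (cyc.contains (pvWalkB g cyc (g.size + 1) x) && (pvWalkB g cyc (g.size + 1) x == rt)))) : Int) := by
  have hofl : PySem.Set.ofList [rt] = [rt] := rfl
  have hsize : g.size = g.keys.length := by
    simp [PySem.Dict.size, PySem.Dict.keys]
  obtain ⟨ps, heq, ⟨hndF, hshapeF, hwalkF⟩, hclF⟩ :=
    pvDfs_main g cyc rt hk (2 * g.size + 1) [rt] [rt] 0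
      (by
        have := List.length_filter_le (fun x => decide (x ∉ ([rt] : List Int))) g.keys
        simp only [List.length_cons, List.length_nil]
        omega)
      (by simp) (by intro x hx; exact hx)
      (by
        refine ⟨by simp, ?_, ?_⟩
        · intro x hx; rcases List.mem_singleton.mp hx with rfl; exact Or.inl rfl
        · intro x hx; rcases List.mem_singleton.mp hx with rfl
          simp only [List.length_singleton]
          simp only [pvWalkN, if_pos hrtc])
      (by intro v hv; exact Or.inl hv)
  rw [hofl, heq]
  have hF : ([rt] : List Int) ++ ps = rt :: ps := by simp
  rw [hF] at hndF hshapeF hwalkF hclF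
  set F := rt :: ps with hFdef
  have hFsub : F ⊆ g.keys := by
    intro x hx
    rcases hshapeF x hx with rfl | ⟨hc, _⟩
    · exact (PySem.Dict.contains_iff_mem_keys g x).mp hrtk
    · exact (PySem.Dict.contains_iff_mem_keys g x).mp hc
  have hFlen : F.length ≤ g.keys.length := (List.subperm_of_subset hndF hFsub).length_le
  set pred : Int → Bool := fun x => !cyc.contains x &&
      (cyc.contains (pvWalkB g cyc (g.size + 1) x) && (pvWalkB g cyc (g.size + 1) x == rt))
    with hpred
  have hfwd : ∀ x ∈ F, x = rt ∨ (x ∈ g.keys ∧ pred x = true) := by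
    intro x hx
    rcases hshapeF x hx with rfl | ⟨hc, hcycx⟩
    · exact Or.inl rfl
    · refine Or.inr ⟨(PySem.Dict.contains_iff_mem_keys g x).mp hc, ?_⟩
      have hw := hwalkF x hx
      have hb : pvWalkB g cyc (g.size + 1) x = rt :=
        pvWalkB_of_pvWalkN hw (by omega)
      rw [hpred]
      simp only [hb, hrtc, hcycx]
      simp
  have hbwd : ∀ x ∈ g.keys, pred x = true → x ∈ F := by
    intro x hxk hpx
    rw [hpred] at hpx
    simp only [Bool.and_eq_true, beq_iff_eq, Bool.not_eq_true'] at hpx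
    obtain ⟨hcycx, hcw, hwr⟩ := hpx
    have hgx : g.contains x = true := (PySem.Dict.contains_iff_mem_keys g x).mpr hxk
    have hwn := pvWalkN_of_pvWalkB Hval hgx hcw
    rw [hwr] at hwn
    exact pvReach_mem g cyc rt F (List.mem_cons_self) hclF (g.size + 1) x hwn
  have hperm : F.Perm (rt :: g.keys.filter pred) := by
    rw [List.perm_ext_iff_of_nodup hndF ?_]
    · intro a
      constructor
      · intro ha
        rcases hfwd a ha with rfl | ⟨hak, hap⟩
        · exact List.mem_cons_self
        · exact List.mem_cons_of_mem _ (List.mem_filter.mpr ⟨hak, hap⟩)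
      · intro ha
        rcases List.mem_cons.mp ha with rfl | ha'
        · exact List.mem_cons_self
        · rcases List.mem_filter.mp ha' with ⟨hak, hap⟩
          exact hbwd a hak hap
    · refine List.nodup_cons.mpr ⟨?_, hk.filter pred⟩
      intro hrtf
      rcases List.mem_filter.mp hrtf with ⟨_, hp⟩
      rw [hpred] at hp
      simp only [Bool.and_eq_true, Bool.not_eq_true'] at hp
      rw [hrtc] at hp
      exact absurd hp.1 (by simp)
  have hlen := hperm.length_eq
  simp only [hFdef, List.length_cons] at hlen
  rw [List.countP_eq_length_filter]
  show (0 : Int) + ((([rt] : List Int).length + ps.length : Nat) : Int) = _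
  simp only [List.length_singleton]
  omega

-- ---- B-side: the exit function (first node along the forward path not yet processed) ----

def pvExit (g : PySem.Dict Int Int) (P : List Int) : Nat → Int → Option Int
  | 0, x => if x ∈ P then none else some x
  | m + 1, x => if x ∈ P then pvExit g P m (g.getD x 0) else some x

lemma pvExit_not_mem {g : PySem.Dict Int Int} {P : List Int} {x : Int} (h : x ∉ P) :
    ∀ f, pvExit g P f x = some x := by
  intro f
  cases f <;> simp only [pvExit, if_neg h]

lemma pvExit_some_not_mem {g : PySem.Dict Int Int} {P : List Int} :
    ∀ {f : Nat} {x z : Int}, pvExit g P f x = some z → z ∉ P := by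
  intro f
  induction f with
  | zero =>
    intro x z h
    by_cases hx : x ∈ P
    · simp only [pvExit, if_pos hx] at h; exact absurd h (by simp)
    · simp only [pvExit, if_neg hx] at h; exact (Option.some.inj h) ▸ hx
  | succ f ih =>
    intro x z h
    by_cases hx : x ∈ P
    · simp only [pvExit, if_pos hx] at h; exact ih h
    · simp only [pvExit, if_neg hx] at h; exact (Option.some.inj h) ▸ hx

lemma pvExit_mem_keys {g : PySem.Dict Int Int} {P : List Int}
    (Hval : ∀ x y : Int, g.get? x = some y → g.contains y = true) :
    ∀ {f : Nat} {x z : Int}, x ∈ g.keys → pvExit g P f x = some z → z ∈ g.keys := by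
  intro f
  induction f with
  | zero =>
    intro x z hx h
    by_cases hm : x ∈ P
    · simp only [pvExit, if_pos hm] at h; exact absurd h (by simp)
    · simp only [pvExit, if_neg hm] at h; exact (Option.some.inj h) ▸ hx
  | succ f ih =>
    intro x z hx h
    by_cases hm : x ∈ P
    · simp only [pvExit, if_pos hm] at h
      obtain ⟨y, hy⟩ : ∃ y, g.get? x = some y := by
        have hx' : g.contains x = true := (PySem.Dict.contains_iff_mem_keys g x).mpr hx
        rw [PySem.Dict.contains_eq_isSome_get?] at hx'
        cases hgy : g.get? x with
        | none => rw [hgy] at hx'; exact absurd hx' (by simp)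
        | some y => exact ⟨y, rfl⟩
      rw [PySem.Dict.getD_of_get?_eq_some g 0 hy] at h
      exact ih ((PySem.Dict.contains_iff_mem_keys g y).mp (Hval x y hy)) h
    · simp only [pvExit, if_neg hm] at h; exact (Option.some.inj h) ▸ hx

lemma pvExit_append {g : PySem.Dict Int Int} {P : List Int} {x0 : Int}
    (hx0 : x0 ∉ P) (hy : g.getD x0 0 ∉ P) (hyx0 : g.getD x0 0 ≠ x0) :
    ∀ {f : Nat} {x z : Int}, pvExit g P f x = some z →
      pvExit g (P ++ [x0]) (f + 1) x = some (if z = x0 then g.getD x0 0 else z) := by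
  intro f
  induction f with
  | zero =>
    intro x z h
    by_cases hxP : x ∈ P
    · simp only [pvExit, if_pos hxP] at h; exact absurd h (by simp)
    · simp only [pvExit, if_neg hxP] at h
      obtain rfl : x = z := Option.some.inj h
      by_cases hx0 : x = x0
      · rw [hx0]
        have hmem : x0 ∈ P ++ [x0] := by simp
        have hymem : g.getD x0 0 ∉ P ++ [x0] := by
          simp only [List.mem_append, List.mem_singleton]
          rintro (h1 | h1)
          · exact hy h1
          · exact hyx0 h1
        simp only [pvExit, if_pos hmem, if_neg hymem]
        simp
      · have hmem : x ∉ P ++ [x0] := by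
          simp only [List.mem_append, List.mem_singleton]
          rintro (h1 | h1)
          · exact hxP h1
          · exact hx0 h1
        simp only [pvExit, if_neg hmem, if_neg hx0]
  | succ f ih =>
    intro x z h
    by_cases hxP : x ∈ P
    · have hmem : x ∈ P ++ [x0] := List.mem_append_left _ hxP
      simp only [pvExit, if_pos hxP] at h
      simp only [pvExit, if_pos hmem]
      exact ih h
    · simp only [pvExit, if_neg hxP] at h
      obtain rfl : x = z := Option.some.inj h
      by_cases hx0 : x = x0
      · rw [hx0]
        have hmem : x0 ∈ P ++ [x0] := by simp
        have hymem : g.getD x0 0 ∉ P ++ [x0] := by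
          simp only [List.mem_append, List.mem_singleton]
          rintro (h1 | h1)
          · exact hy h1
          · exact hyx0 h1
        simp only [pvExit, if_pos hmem]
        rw [if_neg hymem]
        simp
      · have hmem : x ∉ P ++ [x0] := by
          simp only [List.mem_append, List.mem_singleton]
          rintro (h1 | h1)
          · exact hxP h1
          · exact hx0 h1
        simp only [pvExit, if_neg hmem, if_neg hx0]

lemma pvExit_to_pvWalkN {g : PySem.Dict Int Int} {cyc : PySem.Set Int} {P : List Int}
    (hP : ∀ p ∈ P, p ∈ g.keys ∧ cyc.contains p = false) :
    ∀ {f : Nat} {x z : Int}, pvExit g P f x = some z → cyc.contains z = true →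
      ∃ m ≤ f, pvWalkN g cyc m x = some z := by
  intro f
  induction f with
  | zero =>
    intro x z h hz
    by_cases hxP : x ∈ P
    · simp only [pvExit, if_pos hxP] at h; exact absurd h (by simp)
    · simp only [pvExit, if_neg hxP] at h
      obtain rfl : x = z := Option.some.inj h
      exact ⟨0, Nat.le_refl 0, by simp only [pvWalkN, if_pos hz]⟩
  | succ f ih =>
    intro x z h hz
    by_cases hxP : x ∈ P
    · simp only [pvExit, if_pos hxP] at h
      obtain ⟨hxk, hxc⟩ := hP x hxP
      obtain ⟨y, hy⟩ : ∃ y, g.get? x = some y := by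
        have hx' : g.contains x = true := (PySem.Dict.contains_iff_mem_keys g x).mpr hxk
        rw [PySem.Dict.contains_eq_isSome_get?] at hx'
        cases hgy : g.get? x with
        | none => rw [hgy] at hx'; exact absurd hx' (by simp)
        | some y => exact ⟨y, rfl⟩
      rw [PySem.Dict.getD_of_get?_eq_some g 0 hy] at h
      obtain ⟨m, hm, hw⟩ := ih h hz
      refine ⟨m + 1, by omega, ?_⟩
      have hnc : ¬ cyc.contains x = true := by rw [hxc]; exact Bool.false_ne_true
      simp only [pvWalkN, if_neg hnc, hy, Option.bind_some]
      exact hw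
    · simp only [pvExit, if_neg hxP] at h
      obtain rfl : x = z := Option.some.inj h
      exact ⟨0, Nat.zero_le _, by simp only [pvWalkN, if_pos hz]⟩

lemma pvWalkN_none_of_exit {g : PySem.Dict Int Int} {cyc : PySem.Set Int} {P : List Int}
    (hP : ∀ p ∈ P, p ∈ g.keys ∧ cyc.contains p = false) :
    ∀ {f : Nat} {x z : Int}, pvExit g P f x = some z →
      (∀ m, pvWalkN g cyc m z = none) → ∀ m, pvWalkN g cyc m x = none := by
  intro f
  induction f with
  | zero =>
    intro x z h hnone m
    by_cases hxP : x ∈ P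
    · simp only [pvExit, if_pos hxP] at h; exact absurd h (by simp)
    · simp only [pvExit, if_neg hxP] at h
      obtain rfl : x = z := Option.some.inj h
      exact hnone m
  | succ f ih =>
    intro x z h hnone m
    by_cases hxP : x ∈ P
    · simp only [pvExit, if_pos hxP] at h
      obtain ⟨hxk, hxc⟩ := hP x hxP
      obtain ⟨y, hy⟩ : ∃ y, g.get? x = some y := by
        have hx' : g.contains x = true := (PySem.Dict.contains_iff_mem_keys g x).mpr hxk
        rw [PySem.Dict.contains_eq_isSome_get?] at hx'
        cases hgy : g.get? x with
        | none => rw [hgy] at hx'; exact absurd hx' (by simp)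
        | some y => exact ⟨y, rfl⟩
      rw [PySem.Dict.getD_of_get?_eq_some g 0 hy] at h
      have hnc : ¬ cyc.contains x = true := by rw [hxc]; exact Bool.false_ne_true
      cases m with
      | zero => simp only [pvWalkN, if_neg hnc]
      | succ m =>
        simp only [pvWalkN, if_neg hnc, hy, Option.bind_some]
        exact ih h hnone m
    · simp only [pvExit, if_neg hxP] at h
      obtain rfl : x = z := Option.some.inj h
      exact hnone m

-- ---- counting helpers ----

lemma pvCountP_or_disjoint {α : Type} (l : List α) (p q : α → Bool)
    (h : ∀ a ∈ l, ¬(p a = true ∧ q a = true)) :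
    l.countP (fun a => p a || q a) = l.countP p + l.countP q := by
  induction l with
  | nil => simp
  | cons a l ih =>
    have h' : ∀ a ∈ l, ¬(p a = true ∧ q a = true) :=
      fun a ha => h a (List.mem_cons_of_mem _ ha)
    have hhead := h a List.mem_cons_self
    rw [List.countP_cons, List.countP_cons, List.countP_cons, ih h']
    cases hp : p a <;> cases hq : q a <;> simp [hp, hq] at hhead ⊢ <;> omega

-- ---- B-side: initial-state lemmas ----

lemma pvIndeg0_getD (g : PySem.Dict Int Int) (v : Int) : (pvIndeg0 g).getD v 0 = 0 := by
  unfold pvIndeg0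
  have : ∀ (l : List Int) (d : PySem.Dict Int Int), d.getD v 0 = 0 →
      (l.foldl (fun d x => d.insert x (0 : Int)) d).getD v 0 = 0 := by
    intro l
    induction l with
    | nil => intro d h; exact h
    | cons x xs ih =>
      intro d h
      refine ih _ ?_
      rw [PySem.Dict.getD_insert]
      split <;> simp [h]
  exact this _ _ (by simp [pysem])

lemma pvDec_getD (key : Int → Int) :
    ∀ (l : List Int) (d : PySem.Dict Int Int) (v : Int),
    (l.foldl (fun d r => d.modify (key r) 0 (· - 1)) d).getD v 0
      = d.getD v 0 - (l.countP (fun r => key r == v) : Int) := by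
  intro l
  induction l with
  | nil => intro d v; simp
  | cons r l ih =>
    intro d v
    rw [List.foldl_cons, ih, PySem.Dict.getD_modify, List.countP_cons]
    by_cases hv : v = key r
    · have hb : (key r == v) = true := by simp [hv]
      rw [if_pos hv, hb, hv]
      simp only [if_true]
      push_cast
      omega
    · have hb : (key r == v) = false := by simp; exact fun hh => hv hh.symm
      rw [if_neg hv, hb]
      push_cast
      omega

lemma pvIndeg_getD (g : PySem.Dict Int Int) (cyc : PySem.Set Int)
    (hk : g.keys.Nodup) (hcyc : cyc.Nodup) (hcK : ∀ r ∈ cyc, r ∈ g.keys) (v : Int) :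
    (pvIndeg g cyc).getD v 0
      = (g.keys.countP (fun q => !cyc.contains q && (g.getD q 0 == v)) : Int) := by
  unfold pvIndeg pvIndeg1
  rw [pvDec_getD, PySem.Dict.getD_foldl_modify_add_one, pvIndeg0_getD]
  have hvals : g.values.count v = g.keys.countP (fun q => g.getD q 0 == v) := by
    rw [PySem.Dict.values_eq_map_keys g hk 0]
    generalize g.keys = l
    induction l with
    | nil => simp
    | cons a l ih => rw [List.map_cons, List.count_cons, List.countP_cons, ih]
  have hcnt : cyc.countP (fun r => g.getD r 0 == v)
      = g.keys.countP (fun q => cyc.contains q && (g.getD q 0 == v)) := by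
    rw [List.countP_eq_length_filter, List.countP_eq_length_filter]
    refine List.Perm.length_eq ?_
    rw [List.perm_ext_iff_of_nodup (hcyc.filter _) (hk.filter _)]
    intro a
    simp only [List.mem_filter, Bool.and_eq_true]
    constructor
    · rintro ⟨ha, hp⟩
      exact ⟨hcK a ha, (PySem.Set.contains_iff cyc a).mpr ha, hp⟩
    · rintro ⟨_, hc, hp⟩
      exact ⟨(PySem.Set.contains_iff cyc a).mp hc, hp⟩
  have hsplit : g.keys.countP (fun q => g.getD q 0 == v)
      = g.keys.countP (fun q => cyc.contains q && (g.getD q 0 == v))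
        + g.keys.countP (fun q => !cyc.contains q && (g.getD q 0 == v)) := by
    rw [← pvCountP_or_disjoint g.keys _ _ ?_]
    · refine List.countP_congr ?_
      intro q _
      cases hc : cyc.contains q <;> cases hp : (g.getD q 0 == v) <;> simp [hc, hp]
    · intro q _
      rintro ⟨h1, h2⟩
      simp only [Bool.and_eq_true, Bool.not_eq_true'] at h1 h2
      rw [h1.1] at h2
      exact absurd h2.1 (by simp)
  rw [hvals, hcnt]
  push_cast
  omega

lemma pvSize0_keys (g : PySem.Dict Int Int) (cyc : PySem.Set Int) (hk : g.keys.Nodup) :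
    (pvSize0 g cyc).keys = g.keys.filter (fun x => !cyc.contains x) := by
  unfold pvSize0
  have haux : ∀ (l : List Int) (d : PySem.Dict Int Int), l.Nodup →
      (∀ x ∈ l, d.contains x = false) →
      (l.foldl (fun d x => if cyc.contains x then d else d.insert x (1 : Int)) d).keys
        = d.keys ++ l.filter (fun x => !cyc.contains x) := by
    intro l
    induction l with
    | nil => intro d _ _; simp
    | cons x l ih =>
      intro d hnd hfr
      rw [List.foldl_cons]
      by_cases hC : cyc.contains x = true
      · rw [if_pos hC]
        rw [ih d (List.nodup_cons.mp hnd).2 (fun z hz => hfr z (List.mem_cons_of_mem _ hz))]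
        have : (!cyc.contains x) = false := by rw [hC]; rfl
        rw [List.filter_cons_of_neg (by rw [this]; exact Bool.false_ne_true)]
      · rw [if_neg hC]
        have hC' : cyc.contains x = false := by
          cases hc : cyc.contains x
          · rfl
          · exact absurd hc hC
        rw [ih (d.insert x 1) (List.nodup_cons.mp hnd).2 ?_]
        · rw [PySem.Dict.keys_insert_of_not_contains _ _ (hfr x List.mem_cons_self)]
          rw [List.filter_cons_of_pos (by rw [hC']; rfl)]
          simp
        · intro z hz
          rw [PySem.Dict.contains_insert]
          have hzx : (z == x) = false := by
            simp only [beq_eq_false_iff_ne]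
            intro hzz
            exact (List.nodup_cons.mp hnd).1 (hzz ▸ hz)
          rw [hzx, hfr z (List.mem_cons_of_mem _ hz)]
          rfl
  rw [haux g.keys PySem.Dict.empty hk (fun z _ => by simp [pysem])]
  simp [pysem]

lemma pvSize0_getD (g : PySem.Dict Int Int) (cyc : PySem.Set Int) {y : Int}
    (hy : y ∈ g.keys) (hyc : cyc.contains y = false) : (pvSize0 g cyc).getD y 0 = 1 := by
  unfold pvSize0
  have haux : ∀ (l : List Int) (d : PySem.Dict Int Int), d.getD y 0 = 1 →
      (l.foldl (fun d x => if cyc.contains x then d else d.insert x (1 : Int)) d).getD y 0 = 1 := by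
    intro l
    induction l with
    | nil => intro d h; exact h
    | cons x l ih =>
      intro d h
      rw [List.foldl_cons]
      by_cases hC : cyc.contains x = true
      · rw [if_pos hC]; exact ih d h
      · rw [if_neg hC]
        refine ih _ ?_
        rw [PySem.Dict.getD_insert]
        split <;> simp [h]
  have hmain : ∀ (l : List Int) (d : PySem.Dict Int Int), y ∈ l →
      (l.foldl (fun d x => if cyc.contains x then d else d.insert x (1 : Int)) d).getD y 0 = 1 := by
    intro l
    induction l with
    | nil => intro d h; exact absurd h (List.not_mem_nil)
    | cons x l ih =>
      intro d hmem
      rw [List.foldl_cons]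
      by_cases hxy : y = x
      · have hC : ¬ cyc.contains x = true := by rw [← hxy, hyc]; exact Bool.false_ne_true
        rw [if_neg hC]
        refine haux l _ ?_
        rw [← hxy, PySem.Dict.getD_insert_self]
      · rcases List.mem_cons.mp hmem with h | h
        · exact absurd h hxy
        · exact ih _ h
  exact hmain g.keys PySem.Dict.empty hy

-- ---- B-side: the peeling loop ----

lemma pvLoopB_keys (g : PySem.Dict Int Int) (cyc : PySem.Set Int) :
    ∀ (fuel : Nat) (stack : List Int) (size indeg ts : PySem.Dict Int Int),
    (∀ c : Int, cyc.contains c = true → ts.contains c = true) →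
    (pvLoopB g cyc fuel stack size indeg ts).keys = ts.keys := by
  intro fuel
  induction fuel with
  | zero => intro stack size indeg ts _; simp [pvLoopB]
  | succ fuel ih =>
    intro stack size indeg ts h
    cases stack with
    | nil => simp [pvLoopB]
    | cons x rest =>
      simp only [pvLoopB]
      by_cases hCy : cyc.contains (g.getD x 0) = true
      · rw [if_pos hCy]
        have hcont := h _ hCy
        have hkeys : (ts.modify (g.getD x 0) 0 (· + size.getD x 0)).keys = ts.keys := by
          rw [PySem.Dict.keys_modify, PySem.Dict.keys_insert_of_contains]
          exact hcont
        have hpres : ∀ c : Int, cyc.contains c = true →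
            (ts.modify (g.getD x 0) 0 (· + size.getD x 0)).contains c = true := by
          intro c hc
          rw [PySem.Dict.contains_modify]
          simp [h c hc]
        rw [ih _ _ _ _ hpres, hkeys]
      · rw [if_neg hCy]
        by_cases hz : (indeg.modify (g.getD x 0) 0 (· - 1)).getD (g.getD x 0) 0 == 0
        · rw [if_pos hz]
          exact ih _ _ _ _ h
        · rw [if_neg hz]
          exact ih _ _ _ _ h

lemma pvFilter_mono (K : List Int) (p q : Int → Bool)
    (himp : ∀ z ∈ K, q z = true → p z = true) :
    (K.filter q).length ≤ (K.filter p).length := by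
  have heq : K.filter q = (K.filter p).filter q := by
    rw [List.filter_filter]
    refine (List.filter_congr ?_).symm
    intro a ha
    cases hq : q a
    · simp
    · simp [himp a ha hq]
  rw [heq]
  exact List.length_filter_le _ _

lemma pvFilter_drop2 (K : List Int) (p q : Int → Bool) (x : Int)
    (himp : ∀ z ∈ K, q z = true → p z = true)
    (hx : x ∈ K) (hpx : p x = true) (hqx : q x = false) :
    (K.filter q).length + 1 ≤ (K.filter p).length := by
  have heq : K.filter q = (K.filter p).filter q := by
    rw [List.filter_filter]
    refine (List.filter_congr ?_).symm
    intro a ha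
    cases hq : q a
    · simp
    · simp [himp a ha hq]
  rw [heq]
  have hlt : ((K.filter p).filter q).length < (K.filter p).length := by
    rw [List.length_filter_lt_length_iff_exists]
    exact ⟨x, List.mem_filter.mpr ⟨hx, hpx⟩, by simp [hqx]⟩
  omega

lemma pvLoopB_main (g : PySem.Dict Int Int) (cyc : PySem.Set Int) (hk : g.keys.Nodup)
    (Hval : ∀ x y : Int, g.get? x = some y → g.contains y = true) :
    ∀ (fuel : Nat) (stack : List Int) (size indeg ts : PySem.Dict Int Int) (P : List Int),
    (g.keys.filter (fun z => !cyc.contains z && decide (z ∉ P))).length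
      + ((g.keys.filter (fun z => !cyc.contains z && decide (z ∉ P))).filter
          (fun z => decide (z ∉ stack))).length ≤ fuel →
    stack.Nodup →
    (∀ x ∈ stack, x ∈ g.keys ∧ cyc.contains x = false ∧ x ∉ P) →
    P.Nodup →
    (∀ p ∈ P, p ∈ g.keys ∧ cyc.contains p = false) →
    (∀ p ∈ P, ∀ q ∈ g.keys, cyc.contains q = false → q ∉ P → g.getD q 0 ≠ p) →
    (∀ v : Int, cyc.contains v = false → indeg.getD v 0
      = (g.keys.countP (fun q => !cyc.contains q && decide (q ∉ P) && (g.getD q 0 == v)) : Int)) →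
    (∀ v ∈ g.keys, cyc.contains v = false → v ∉ P → (v ∈ stack ↔ indeg.getD v 0 = 0)) →
    (∀ x ∈ g.keys, cyc.contains x = false → ∃ z, pvExit g P P.length x = some z) →
    (∀ v ∈ g.keys, cyc.contains v = false → v ∉ P → size.getD v 0
      = (g.keys.countP (fun x => !cyc.contains x && (pvExit g P P.length x == some v)) : Int)) →
    (∀ r : Int, cyc.contains r = true → ts.getD r 0
      = 1 + (g.keys.countP (fun x => !cyc.contains x && (pvExit g P P.length x == some r)) : Int)) →
    ∃ P' : List Int,
      P'.Nodup
      ∧ (∀ p ∈ P', p ∈ g.keys ∧ cyc.contains p = false)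
      ∧ (∀ x ∈ g.keys, cyc.contains x = false → ∃ z, pvExit g P' P'.length x = some z)
      ∧ (∀ u ∈ g.keys, cyc.contains u = false → u ∉ P' →
          ∃ q ∈ g.keys, cyc.contains q = false ∧ q ∉ P' ∧ g.getD q 0 = u)
      ∧ (∀ r : Int, cyc.contains r = true →
          (pvLoopB g cyc fuel stack size indeg ts).getD r 0
            = 1 + (g.keys.countP (fun x => !cyc.contains x
                && (pvExit g P' P'.length x == some r)) : Int)) := by
  intro fuel
  induction fuel with
  | zero =>
    intro stack size indeg ts P hmeas hS1 hS2 hPnd hP2 hI8 hI3 hI4 hE hI6 hI7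
    refine ⟨P, hPnd, hP2, hE, ?_, ?_⟩
    · intro u huK huC huP
      exfalso
      have hmem : u ∈ g.keys.filter (fun z => !cyc.contains z && decide (z ∉ P)) :=
        List.mem_filter.mpr ⟨huK, by rw [huC]; simp [huP]⟩
      have hlen := List.length_pos_of_mem hmem
      omega
    · intro r hr
      simpa [pvLoopB] using hI7 r hr
  | succ fuel ih =>
    intro stack size indeg ts P hmeas hS1 hS2 hPnd hP2 hI8 hI3 hI4 hE hI6 hI7
    cases stack with
    | nil =>
      refine ⟨P, hPnd, hP2, hE, ?_, ?_⟩
      · intro u huK huC huP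
        have hne : indeg.getD u 0 ≠ 0 := by
          intro h0
          exact absurd ((hI4 u huK huC huP).mpr h0) (List.not_mem_nil)
        rw [hI3 u huC] at hne
        have hpos : 0 < g.keys.countP
            (fun q => !cyc.contains q && decide (q ∉ P) && (g.getD q 0 == u)) := by
          rcases Nat.eq_zero_or_pos (g.keys.countP
            (fun q => !cyc.contains q && decide (q ∉ P) && (g.getD q 0 == u))) with h | h
          · rw [h] at hne; simp at hne
          · exact h
        obtain ⟨q, hqK, hq⟩ := List.countP_pos_iff.mp hpos
        simp only [Bool.and_eq_true, Bool.not_eq_true', decide_eq_true_eq, beq_iff_eq] at hq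
        exact ⟨q, hqK, hq.1.1, hq.1.2, hq.2⟩
      · intro r hr
        simpa [pvLoopB] using hI7 r hr
    | cons x0 rest =>
      obtain ⟨hx0K, hx0C, hx0P⟩ := hS2 x0 List.mem_cons_self
      have hind0 : indeg.getD x0 0 = 0 := (hI4 x0 hx0K hx0C hx0P).mp List.mem_cons_self
      have hcount0 : g.keys.countP
          (fun q => !cyc.contains q && decide (q ∉ P) && (g.getD q 0 == x0)) = 0 := by
        have hh := hI3 x0 hx0C
        rw [hind0] at hh
        exact_mod_cast hh.symm
      have hnopred : ∀ q ∈ g.keys, cyc.contains q = false → q ∉ P → g.getD q 0 ≠ x0 := by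
        intro q hqK hqC hqP hq
        have hz := List.countP_eq_zero.mp hcount0 q hqK
        rw [hqC, hq] at hz
        simp [hqP] at hz
      obtain ⟨y, hy⟩ : ∃ y, g.get? x0 = some y := by
        have hx' : g.contains x0 = true := (PySem.Dict.contains_iff_mem_keys g x0).mpr hx0K
        rw [PySem.Dict.contains_eq_isSome_get?] at hx'
        cases hgy : g.get? x0 with
        | none => rw [hgy] at hx'; exact absurd hx' (by simp)
        | some y => exact ⟨y, rfl⟩
      have hgd : g.getD x0 0 = y := PySem.Dict.getD_of_get?_eq_some g 0 hy
      have hyK : y ∈ g.keys := (PySem.Dict.contains_iff_mem_keys g y).mp (Hval x0 y hy)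
      have hyx0 : y ≠ x0 := fun h => hnopred x0 hx0K hx0C hx0P (by rw [hgd, h])
      have hyP : y ∉ P := fun hyP => hI8 y hyP x0 hx0K hx0C hx0P hgd
      have hx0rest : x0 ∉ rest := (List.nodup_cons.mp hS1).1
      have hS1' : rest.Nodup := (List.nodup_cons.mp hS1).2
      have hP'len : (P ++ [x0]).length = P.length + 1 := by simp
      have hexit' : ∀ {x z : Int}, pvExit g P P.length x = some z →
          pvExit g (P ++ [x0]) (P ++ [x0]).length x = some (if z = x0 then y else z) := by
        intro x z h
        rw [hP'len]
        have hh := pvExit_append (g := g) (P := P) (x0 := x0) hx0P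
          (by rw [hgd]; exact hyP) (by rw [hgd]; exact hyx0) h
        rw [hgd] at hh
        exact hh
      have hE' : ∀ x ∈ g.keys, cyc.contains x = false →
          ∃ z, pvExit g (P ++ [x0]) (P ++ [x0]).length x = some z := by
        intro x hx hc
        obtain ⟨z, hz⟩ := hE x hx hc
        exact ⟨_, hexit' hz⟩
      have hPnd' : (P ++ [x0]).Nodup := by
        refine List.Nodup.append hPnd (by simp) ?_
        intro a ha hb
        rcases List.mem_singleton.mp hb with rfl
        exact hx0P ha
      have hP2' : ∀ p ∈ P ++ [x0], p ∈ g.keys ∧ cyc.contains p = false := by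
        intro p hp
        rcases List.mem_append.mp hp with h | h
        · exact hP2 p h
        · rcases List.mem_singleton.mp h with rfl
          exact ⟨hx0K, hx0C⟩
      have hI8' : ∀ p ∈ P ++ [x0], ∀ q ∈ g.keys,
          cyc.contains q = false → q ∉ P ++ [x0] → g.getD q 0 ≠ p := by
        intro p hp q hqK hqC hqP'
        have hqP : q ∉ P := fun h => hqP' (List.mem_append_left _ h)
        rcases List.mem_append.mp hp with h | h
        · exact hI8 p h q hqK hqC hqP
        · rcases List.mem_singleton.mp h with rfl
          exact hnopred q hqK hqC hqP
      have hnotmemP' : ∀ z : Int, z ∉ P ++ [x0] ↔ (z ∉ P ∧ z ≠ x0) := by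
        intro z
        simp only [List.mem_append, List.mem_singleton]
        constructor
        · intro h; exact ⟨fun h1 => h (Or.inl h1), fun h1 => h (Or.inr h1)⟩
        · rintro ⟨h1, h2⟩ (h3 | h3)
          · exact h1 h3
          · exact h2 h3
      have hcnt' : ∀ t : Int, t ≠ x0 → t ≠ y →
          g.keys.countP (fun x => !cyc.contains x
              && (pvExit g (P ++ [x0]) (P ++ [x0]).length x == some t))
            = g.keys.countP (fun x => !cyc.contains x
              && (pvExit g P P.length x == some t)) := by
        intro t ht0 hty
        refine List.countP_congr ?_
        intro x hxK
        by_cases hcxT : cyc.contains x = true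
        · rw [hcxT]; simp
        · have hcx' : cyc.contains x = false := by
            cases hcc : cyc.contains x
            · rfl
            · exact absurd hcc hcxT
          obtain ⟨z, hz⟩ := hE x hxK hcx'
          have hz' := hexit' hz
          rw [hcx', hz, hz']
          by_cases hzx0 : z = x0
          · rw [if_pos hzx0]
            have h1 : (some y == some t) = false := by
              simp only [beq_eq_false_iff_ne, ne_eq, Option.some.injEq]
              exact fun h => hty h.symm
            have h2 : (some z == some t) = false := by
              simp only [beq_eq_false_iff_ne, ne_eq, Option.some.injEq, hzx0]
              exact fun h => ht0 h.symm
            rw [h1, h2]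
          · rw [if_neg hzx0]
      have hcnty : g.keys.countP (fun x => !cyc.contains x
              && (pvExit g (P ++ [x0]) (P ++ [x0]).length x == some y))
            = g.keys.countP (fun x => !cyc.contains x && (pvExit g P P.length x == some y))
              + g.keys.countP (fun x => !cyc.contains x && (pvExit g P P.length x == some x0)) := by
        rw [← pvCountP_or_disjoint g.keys _ _ ?_]
        · refine List.countP_congr ?_
          intro x hxK
          by_cases hcxT : cyc.contains x = true
          · rw [hcxT]; simp
          · have hcx' : cyc.contains x = false := by
              cases hcc : cyc.contains x
              · rfl
              · exact absurd hcc hcxT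
            obtain ⟨z, hz⟩ := hE x hxK hcx'
            have hz' := hexit' hz
            rw [hcx', hz, hz']
            by_cases hzx0 : z = x0
            · rw [if_pos hzx0, hzx0]
              simp
            · rw [if_neg hzx0]
              have h2 : (some z == some x0) = false := by
                simp only [beq_eq_false_iff_ne, ne_eq, Option.some.injEq]
                exact hzx0
              rw [h2]
              simp
        · intro x _ hand
          obtain ⟨h1, h2⟩ := hand
          simp only [Bool.and_eq_true, beq_iff_eq] at h1 h2
          rw [h1.2] at h2
          exact hyx0 (Option.some.inj h2.2)
      have hcntx0pos : 0 < g.keys.countP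
          (fun x => !cyc.contains x && (pvExit g P P.length x == some x0)) := by
        refine List.countP_pos_iff.mpr ⟨x0, hx0K, ?_⟩
        rw [pvExit_not_mem hx0P, hx0C]
        simp
      -- the combined-measure view of the old state
      have hmeasc := hmeas
      rw [List.filter_filter] at hmeasc
      have himpUP : ∀ z ∈ g.keys,
          (!cyc.contains z && decide (z ∉ P ++ [x0])) = true →
          (!cyc.contains z && decide (z ∉ P)) = true := by
        intro z _ hz
        simp only [Bool.and_eq_true, decide_eq_true_eq, hnotmemP'] at hz ⊢
        exact ⟨hz.1, hz.2.1⟩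
      have hUPdrop : (g.keys.filter (fun z => !cyc.contains z && decide (z ∉ P ++ [x0]))).length + 1
          ≤ (g.keys.filter (fun z => !cyc.contains z && decide (z ∉ P))).length := by
        refine pvFilter_drop2 g.keys _ _ x0 himpUP hx0K (by rw [hx0C]; simp [hx0P]) ?_
        simp [hnotmemP']
      by_cases hCy : cyc.contains y = true
      · -- delivery: tree_sizes[y] += size[x0]
        have heq : pvLoopB g cyc (fuel + 1) (x0 :: rest) size indeg ts
            = pvLoopB g cyc fuel rest size indeg
                (ts.modify y 0 (· + size.getD x0 0)) := by
          simp only [pvLoopB, hgd, if_pos hCy]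
        have hts' : ∀ r : Int, cyc.contains r = true →
            (ts.modify y 0 (· + size.getD x0 0)).getD r 0
              = 1 + (g.keys.countP (fun x => !cyc.contains x
                  && (pvExit g (P ++ [x0]) (P ++ [x0]).length x == some r)) : Int) := by
          intro r hr
          have hrx0 : r ≠ x0 := by
            intro h
            rw [h, hx0C] at hr
            exact absurd hr (by simp)
          rw [PySem.Dict.getD_modify]
          by_cases hry : r = y
          · rw [if_pos hry, hry]
            have h1 := hI7 y hCy
            have h2 := hI6 x0 hx0K hx0C hx0P
            have h3 := hcnty
            beta_reduce
            rw [h1, h2]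
            push_cast [hcnty]
            ring
          · rw [if_neg hry, hI7 r hr, hcnt' r hrx0 hry]
        have hS2' : ∀ q ∈ rest, q ∈ g.keys ∧ cyc.contains q = false ∧ q ∉ P ++ [x0] := by
          intro q hq
          obtain ⟨h1, h2, h3⟩ := hS2 q (List.mem_cons_of_mem _ hq)
          refine ⟨h1, h2, (hnotmemP' q).mpr ⟨h3, ?_⟩⟩
          intro hqx
          exact hx0rest (hqx ▸ hq)
        have hI3' : ∀ v : Int, cyc.contains v = false → indeg.getD v 0
            = (g.keys.countP (fun q => !cyc.contains q && decide (q ∉ P ++ [x0])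
                && (g.getD q 0 == v)) : Int) := by
          intro v hv
          rw [hI3 v hv]
          have hcc : g.keys.countP (fun q => !cyc.contains q && decide (q ∉ P)
                && (g.getD q 0 == v))
              = g.keys.countP (fun q => !cyc.contains q && decide (q ∉ P ++ [x0])
                && (g.getD q 0 == v)) := by
            refine List.countP_congr ?_
            intro q _
            by_cases hqx : q = x0
            · have hgq : (g.getD q 0 == v) = false := by
                rw [hqx, hgd]
                simp only [beq_eq_false_iff_ne, ne_eq]
                intro h
                rw [← h] at hv
                rw [hCy] at hv
                exact absurd hv (by simp)
              rw [hgq]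
              simp
            · have hmm : decide (q ∉ P) = decide (q ∉ P ++ [x0]) := by
                simp only [decide_eq_decide, hnotmemP']
                constructor
                · intro h; exact ⟨h, hqx⟩
                · intro h; exact h.1
              rw [hmm]
          exact_mod_cast hcc
        have hI4' : ∀ v ∈ g.keys, cyc.contains v = false → v ∉ P ++ [x0] →
            (v ∈ rest ↔ indeg.getD v 0 = 0) := by
          intro v hvK hvC hvP'
          obtain ⟨hvP, hvx0⟩ := (hnotmemP' v).mp hvP'
          rw [← hI4 v hvK hvC hvP]
          constructor
          · intro h; exact List.mem_cons_of_mem _ h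
          · intro h
            rcases List.mem_cons.mp h with h1 | h1
            · exact absurd h1 hvx0
            · exact h1
        have hI6' : ∀ v ∈ g.keys, cyc.contains v = false → v ∉ P ++ [x0] →
            size.getD v 0 = (g.keys.countP (fun x => !cyc.contains x
              && (pvExit g (P ++ [x0]) (P ++ [x0]).length x == some v)) : Int) := by
          intro v hvK hvC hvP'
          obtain ⟨hvP, hvx0⟩ := (hnotmemP' v).mp hvP'
          have hvy : v ≠ y := by
            intro h
            rw [h, hCy] at hvC
            exact absurd hvC (by simp)
          rw [hI6 v hvK hvC hvP, hcnt' v hvx0 hvy]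
        have hmeas' : (g.keys.filter (fun z => !cyc.contains z && decide (z ∉ P ++ [x0]))).length
            + ((g.keys.filter (fun z => !cyc.contains z && decide (z ∉ P ++ [x0]))).filter
                (fun z => decide (z ∉ rest))).length ≤ fuel := by
          rw [List.filter_filter]
          have hsub : (g.keys.filter (fun z => decide (z ∉ rest)
                && (!cyc.contains z && decide (z ∉ P ++ [x0])))).length
              ≤ (g.keys.filter (fun z => decide (z ∉ x0 :: rest)
                && (!cyc.contains z && decide (z ∉ P)))).length := by
            refine pvFilter_mono g.keys _ _ ?_
            intro z hzK hz
            simp only [Bool.and_eq_true, decide_eq_true_eq, hnotmemP', List.mem_cons,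
              not_or] at hz ⊢
            tauto
          omega
        obtain ⟨P'', hN, hA, hB, hC, hD⟩ := ih rest size indeg
          (ts.modify y 0 (· + size.getD x0 0)) (P ++ [x0])
          hmeas' hS1' hS2' hPnd' hP2' hI8' hI3' hI4' hE' hI6' hts'
        refine ⟨P'', hN, hA, hB, hC, ?_⟩
        intro r hr
        rw [heq]
        exact hD r hr
      · -- no delivery: size[y] += size[x0]; indeg[y] -= 1; maybe push y
        have hCy' : cyc.contains y = false := by
          cases hcc : cyc.contains y
          · rfl
          · exact absurd hcc hCy
        have hyP' : y ∉ P ++ [x0] := (hnotmemP' y).mpr ⟨hyP, hyx0⟩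
        have hindy_pos : 0 < g.keys.countP
            (fun q => !cyc.contains q && decide (q ∉ P) && (g.getD q 0 == y)) := by
          refine List.countP_pos_iff.mpr ⟨x0, hx0K, ?_⟩
          rw [hx0C, hgd]
          simp [hx0P]
        have hindy : indeg.getD y 0 ≠ 0 := by
          rw [hI3 y hCy']
          intro hz
          have : (g.keys.countP (fun q => !cyc.contains q && decide (q ∉ P)
              && (g.getD q 0 == y))) = 0 := by exact_mod_cast hz
          omega
        have hynotstack : y ∉ x0 :: rest := by
          intro h
          exact hindy ((hI4 y hyK hCy' hyP).mp h)
        have hynotrest : y ∉ rest := fun h => hynotstack (List.mem_cons_of_mem _ h)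
        have hindeg'y : (indeg.modify y 0 (· - 1)).getD y 0 = indeg.getD y 0 - 1 := by
          rw [PySem.Dict.getD_modify, if_pos rfl]
        -- count at y over P'-pred: one less than over P-pred (x0's edge removed)
        have hcntPy : g.keys.countP (fun q => !cyc.contains q && decide (q ∉ P)
              && (g.getD q 0 == y))
            = g.keys.countP (fun q => !cyc.contains q && decide (q ∉ P ++ [x0])
              && (g.getD q 0 == y)) + 1 := by
          have hsplit := pvCountP_or_disjoint g.keys
            (fun q => !cyc.contains q && decide (q ∉ P ++ [x0]) && (g.getD q 0 == y))
            (fun q => (q == x0))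
            (by
              intro q _ hand
              obtain ⟨h1, h2⟩ := hand
              simp only [beq_iff_eq] at h2
              simp only [Bool.and_eq_true, decide_eq_true_eq, hnotmemP', h2] at h1
              exact h1.1.2.2 rfl)
          have hcong : g.keys.countP (fun q => !cyc.contains q && decide (q ∉ P)
                && (g.getD q 0 == y))
              = g.keys.countP (fun q => (!cyc.contains q && decide (q ∉ P ++ [x0])
                && (g.getD q 0 == y)) || (q == x0)) := by
            refine List.countP_congr ?_
            intro q _
            by_cases hqx : q = x0
            · rw [hqx, hx0C, hgd]
              simp [hx0P]
            · have hmm : decide (q ∉ P) = decide (q ∉ P ++ [x0]) := by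
                simp only [decide_eq_decide, hnotmemP']
                constructor
                · intro h; exact ⟨h, hqx⟩
                · intro h; exact h.1
              have hqx' : (q == x0) = false := by simp [hqx]
              rw [hqx']
              rw [hmm]
              simp
          have hx0cnt : g.keys.countP (fun q => (q == x0)) = 1 := by
            have he : g.keys.countP (fun q => (q == x0)) = g.keys.count x0 := rfl
            have h1 : g.keys.count x0 ≤ 1 := List.nodup_iff_count_le_one.mp hk x0
            have h2 : 0 < g.keys.count x0 := List.count_pos_iff.mpr hx0K
            omega
          rw [hcong, hsplit, hx0cnt]
        by_cases hz : ((indeg.modify y 0 (· - 1)).getD y 0 == 0) = true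
        · -- push y
          have heq : pvLoopB g cyc (fuel + 1) (x0 :: rest) size indeg ts
              = pvLoopB g cyc fuel (y :: rest) (size.modify y 0 (· + size.getD x0 0))
                  (indeg.modify y 0 (· - 1)) ts := by
            simp only [pvLoopB, hgd, if_neg hCy, if_pos hz]
          have hS1'' : (y :: rest).Nodup := List.nodup_cons.mpr ⟨hynotrest, hS1'⟩
          have hS2'' : ∀ q ∈ y :: rest, q ∈ g.keys ∧ cyc.contains q = false ∧ q ∉ P ++ [x0] := by
            intro q hq
            rcases List.mem_cons.mp hq with rfl | hq'
            · exact ⟨hyK, hCy', hyP'⟩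
            · obtain ⟨h1, h2, h3⟩ := hS2 q (List.mem_cons_of_mem _ hq')
              refine ⟨h1, h2, (hnotmemP' q).mpr ⟨h3, ?_⟩⟩
              intro hqx
              exact hx0rest (hqx ▸ hq')
          have hI3'' : ∀ v : Int, cyc.contains v = false →
              (indeg.modify y 0 (· - 1)).getD v 0
                = (g.keys.countP (fun q => !cyc.contains q && decide (q ∉ P ++ [x0])
                    && (g.getD q 0 == v)) : Int) := by
            intro v hv
            rw [PySem.Dict.getD_modify]
            by_cases hvy : v = y
            · rw [if_pos hvy, hvy]
              beta_reduce
              rw [hI3 y hCy']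
              push_cast [hcntPy]
              ring
            · rw [if_neg hvy, hI3 v hv]
              have hcc : g.keys.countP (fun q => !cyc.contains q && decide (q ∉ P)
                    && (g.getD q 0 == v))
                  = g.keys.countP (fun q => !cyc.contains q && decide (q ∉ P ++ [x0])
                    && (g.getD q 0 == v)) := by
                refine List.countP_congr ?_
                intro q _
                by_cases hqx : q = x0
                · have hgq : (g.getD q 0 == v) = false := by
                    rw [hqx, hgd]
                    simp only [beq_eq_false_iff_ne, ne_eq]
                    exact fun h => hvy h.symm
                  rw [hgq]
                  simp
                · have hmm : decide (q ∉ P) = decide (q ∉ P ++ [x0]) := by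
                    simp only [decide_eq_decide, hnotmemP']
                    constructor
                    · intro h; exact ⟨h, hqx⟩
                    · intro h; exact h.1
                  rw [hmm]
              exact_mod_cast hcc
          have hI4'' : ∀ v ∈ g.keys, cyc.contains v = false → v ∉ P ++ [x0] →
              (v ∈ y :: rest ↔ (indeg.modify y 0 (· - 1)).getD v 0 = 0) := by
            intro v hvK hvC hvP'
            obtain ⟨hvP, hvx0⟩ := (hnotmemP' v).mp hvP'
            by_cases hvy : v = y
            · rw [hvy]
              constructor
              · intro _
                exact beq_iff_eq.mp hz
              · intro _
                exact List.mem_cons_self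
            · rw [PySem.Dict.getD_modify, if_neg hvy, ← hI4 v hvK hvC hvP]
              constructor
              · intro h
                rcases List.mem_cons.mp h with h1 | h1
                · exact absurd h1 hvy
                · exact List.mem_cons_of_mem _ h1
              · intro h
                rcases List.mem_cons.mp h with h1 | h1
                · exact absurd h1 hvx0
                · exact List.mem_cons_of_mem _ h1
          have hI6'' : ∀ v ∈ g.keys, cyc.contains v = false → v ∉ P ++ [x0] →
              (size.modify y 0 (· + size.getD x0 0)).getD v 0
                = (g.keys.countP (fun x => !cyc.contains x
                    && (pvExit g (P ++ [x0]) (P ++ [x0]).length x == some v)) : Int) := by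
            intro v hvK hvC hvP'
            obtain ⟨hvP, hvx0⟩ := (hnotmemP' v).mp hvP'
            rw [PySem.Dict.getD_modify]
            by_cases hvy : v = y
            · rw [if_pos hvy, hvy]
              beta_reduce
              rw [hI6 y hyK hCy' hyP, hI6 x0 hx0K hx0C hx0P]
              push_cast [hcnty]
              ring
            · rw [if_neg hvy, hI6 v hvK hvC hvP, hcnt' v hvx0 hvy]
          have hI7'' : ∀ r : Int, cyc.contains r = true → ts.getD r 0
              = 1 + (g.keys.countP (fun x => !cyc.contains x
                  && (pvExit g (P ++ [x0]) (P ++ [x0]).length x == some r)) : Int) := by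
            intro r hr
            have hrx0 : r ≠ x0 := by
              intro h
              rw [h, hx0C] at hr
              exact absurd hr (by simp)
            have hry : r ≠ y := by
              intro h
              rw [h, hCy'] at hr
              exact absurd hr (by simp)
            rw [hI7 r hr, hcnt' r hrx0 hry]
          have hmeas' : (g.keys.filter (fun z => !cyc.contains z && decide (z ∉ P ++ [x0]))).length
              + ((g.keys.filter (fun z => !cyc.contains z && decide (z ∉ P ++ [x0]))).filter
                  (fun z => decide (z ∉ y :: rest))).length ≤ fuel := by
            rw [List.filter_filter]
            have hsub : (g.keys.filter (fun z => decide (z ∉ y :: rest)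
                  && (!cyc.contains z && decide (z ∉ P ++ [x0])))).length
                ≤ (g.keys.filter (fun z => decide (z ∉ x0 :: rest)
                  && (!cyc.contains z && decide (z ∉ P)))).length := by
              refine pvFilter_mono g.keys _ _ ?_
              intro z hzK hzp
              simp only [Bool.and_eq_true, decide_eq_true_eq, hnotmemP', List.mem_cons,
                not_or] at hzp ⊢
              tauto
            omega
          obtain ⟨P'', hN, hA, hB, hC, hD⟩ := ih (y :: rest)
            (size.modify y 0 (· + size.getD x0 0)) (indeg.modify y 0 (· - 1)) ts (P ++ [x0])
            hmeas' hS1'' hS2'' hPnd' hP2' hI8' hI3'' hI4'' hE' hI6'' hI7''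
          refine ⟨P'', hN, hA, hB, hC, ?_⟩
          intro r hr
          rw [heq]
          exact hD r hr
        · -- no push
          have heq : pvLoopB g cyc (fuel + 1) (x0 :: rest) size indeg ts
              = pvLoopB g cyc fuel rest (size.modify y 0 (· + size.getD x0 0))
                  (indeg.modify y 0 (· - 1)) ts := by
            simp only [pvLoopB, hgd, if_neg hCy, if_neg hz]
          have hS2'' : ∀ q ∈ rest, q ∈ g.keys ∧ cyc.contains q = false ∧ q ∉ P ++ [x0] := by
            intro q hq
            obtain ⟨h1, h2, h3⟩ := hS2 q (List.mem_cons_of_mem _ hq)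
            refine ⟨h1, h2, (hnotmemP' q).mpr ⟨h3, ?_⟩⟩
            intro hqx
            exact hx0rest (hqx ▸ hq)
          have hI3'' : ∀ v : Int, cyc.contains v = false →
              (indeg.modify y 0 (· - 1)).getD v 0
                = (g.keys.countP (fun q => !cyc.contains q && decide (q ∉ P ++ [x0])
                    && (g.getD q 0 == v)) : Int) := by
            intro v hv
            rw [PySem.Dict.getD_modify]
            by_cases hvy : v = y
            · rw [if_pos hvy, hvy]
              beta_reduce
              rw [hI3 y hCy']
              push_cast [hcntPy]
              ring
            · rw [if_neg hvy, hI3 v hv]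
              have hcc : g.keys.countP (fun q => !cyc.contains q && decide (q ∉ P)
                    && (g.getD q 0 == v))
                  = g.keys.countP (fun q => !cyc.contains q && decide (q ∉ P ++ [x0])
                    && (g.getD q 0 == v)) := by
                refine List.countP_congr ?_
                intro q _
                by_cases hqx : q = x0
                · have hgq : (g.getD q 0 == v) = false := by
                    rw [hqx, hgd]
                    simp only [beq_eq_false_iff_ne, ne_eq]
                    exact fun h => hvy h.symm
                  rw [hgq]
                  simp
                · have hmm : decide (q ∉ P) = decide (q ∉ P ++ [x0]) := by
                    simp only [decide_eq_decide, hnotmemP']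
                    constructor
                    · intro h; exact ⟨h, hqx⟩
                    · intro h; exact h.1
                  rw [hmm]
              exact_mod_cast hcc
          have hI4'' : ∀ v ∈ g.keys, cyc.contains v = false → v ∉ P ++ [x0] →
              (v ∈ rest ↔ (indeg.modify y 0 (· - 1)).getD v 0 = 0) := by
            intro v hvK hvC hvP'
            obtain ⟨hvP, hvx0⟩ := (hnotmemP' v).mp hvP'
            by_cases hvy : v = y
            · rw [hvy]
              constructor
              · intro h
                exact absurd h hynotrest
              · intro h
                exact absurd (beq_iff_eq.mpr h) (by simpa using hz)
            · rw [PySem.Dict.getD_modify, if_neg hvy, ← hI4 v hvK hvC hvP]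
              constructor
              · intro h
                exact List.mem_cons_of_mem _ h
              · intro h
                rcases List.mem_cons.mp h with h1 | h1
                · exact absurd h1 hvx0
                · exact h1
          have hI6'' : ∀ v ∈ g.keys, cyc.contains v = false → v ∉ P ++ [x0] →
              (size.modify y 0 (· + size.getD x0 0)).getD v 0
                = (g.keys.countP (fun x => !cyc.contains x
                    && (pvExit g (P ++ [x0]) (P ++ [x0]).length x == some v)) : Int) := by
            intro v hvK hvC hvP'
            obtain ⟨hvP, hvx0⟩ := (hnotmemP' v).mp hvP'
            rw [PySem.Dict.getD_modify]
            by_cases hvy : v = y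
            · rw [if_pos hvy, hvy]
              beta_reduce
              rw [hI6 y hyK hCy' hyP, hI6 x0 hx0K hx0C hx0P]
              push_cast [hcnty]
              ring
            · rw [if_neg hvy, hI6 v hvK hvC hvP, hcnt' v hvx0 hvy]
          have hI7'' : ∀ r : Int, cyc.contains r = true → ts.getD r 0
              = 1 + (g.keys.countP (fun x => !cyc.contains x
                  && (pvExit g (P ++ [x0]) (P ++ [x0]).length x == some r)) : Int) := by
            intro r hr
            have hrx0 : r ≠ x0 := by
              intro h
              rw [h, hx0C] at hr
              exact absurd hr (by simp)
            have hry : r ≠ y := by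
              intro h
              rw [h, hCy'] at hr
              exact absurd hr (by simp)
            rw [hI7 r hr, hcnt' r hrx0 hry]
          have hmeas' : (g.keys.filter (fun z => !cyc.contains z && decide (z ∉ P ++ [x0]))).length
              + ((g.keys.filter (fun z => !cyc.contains z && decide (z ∉ P ++ [x0]))).filter
                  (fun z => decide (z ∉ rest))).length ≤ fuel := by
            rw [List.filter_filter]
            have hsub : (g.keys.filter (fun z => decide (z ∉ rest)
                  && (!cyc.contains z && decide (z ∉ P ++ [x0])))).length
                ≤ (g.keys.filter (fun z => decide (z ∉ x0 :: rest)
                  && (!cyc.contains z && decide (z ∉ P)))).length := by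
              refine pvFilter_mono g.keys _ _ ?_
              intro z hzK hzp
              simp only [Bool.and_eq_true, decide_eq_true_eq, hnotmemP', List.mem_cons,
                not_or] at hzp ⊢
              tauto
            omega
          obtain ⟨P'', hN, hA, hB, hC, hD⟩ := ih rest
            (size.modify y 0 (· + size.getD x0 0)) (indeg.modify y 0 (· - 1)) ts (P ++ [x0])
            hmeas' hS1' hS2'' hPnd' hP2' hI8' hI3'' hI4'' hE' hI6'' hI7''
          refine ⟨P'', hN, hA, hB, hC, ?_⟩
          intro r hr
          rw [heq]
          exact hD r hr

-- ---- B-side: end game (a pred-closed set of unlisted nodes never reaches a listed node) ----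

lemma pvForwardClosed_none (g : PySem.Dict Int Int) (cyc : PySem.Set Int) (L : List Int)
    (hL : ∀ w ∈ L, w ∈ g.keys ∧ cyc.contains w = false ∧ g.getD w 0 ∈ L) :
    ∀ (m : Nat), ∀ w ∈ L, pvWalkN g cyc m w = none := by
  intro m
  induction m with
  | zero =>
    intro w hw
    obtain ⟨_, hc, _⟩ := hL w hw
    simp only [pvWalkN]
    rw [if_neg (by rw [hc]; exact Bool.false_ne_true)]
  | succ m ih =>
    intro w hw
    obtain ⟨hwk, hc, hnext⟩ := hL w hw
    obtain ⟨y, hy⟩ : ∃ y, g.get? w = some y := by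
      have hx' : g.contains w = true := (PySem.Dict.contains_iff_mem_keys g w).mpr hwk
      rw [PySem.Dict.contains_eq_isSome_get?] at hx'
      cases hgy : g.get? w with
      | none => rw [hgy] at hx'; exact absurd hx' (by simp)
      | some y => exact ⟨y, rfl⟩
    have hgd : g.getD w 0 = y := PySem.Dict.getD_of_get?_eq_some g 0 hy
    simp only [pvWalkN]
    rw [if_neg (by rw [hc]; exact Bool.false_ne_true), hy, Option.bind_some]
    exact ih y (hgd ▸ hnext)

lemma pvPredClosed_none (g : PySem.Dict Int Int) (cyc : PySem.Set Int) (U : List Int)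
    (hU : U.Nodup) (hUK : ∀ u ∈ U, u ∈ g.keys ∧ cyc.contains u = false)
    (hpred : ∀ u ∈ U, ∃ q ∈ U, g.getD q 0 = u) :
    ∀ u ∈ U, ∀ (m : Nat), pvWalkN g cyc m u = none := by
  intro u hu
  have hpick : ∀ v ∈ U, (match U.find? (fun q => g.getD q 0 == v) with
      | some q => q
      | none => v) ∈ U ∧ g.getD (match U.find? (fun q => g.getD q 0 == v) with
      | some q => q
      | none => v) 0 = v := by
    intro v hv
    obtain ⟨q, hqU, hq⟩ := hpred v hv
    cases hfind : U.find? (fun q => g.getD q 0 == v) with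
    | none =>
      exfalso
      have := List.find?_eq_none.mp hfind q hqU
      simp [hq] at this
    | some q' =>
      have hq'U := List.mem_of_find?_eq_some hfind
      have hq'p := List.find?_some hfind
      simp only [beq_iff_eq] at hq'p
      simp only [hfind]
      exact ⟨hq'U, hq'p⟩
  let f : Nat → Int := fun n => Nat.rec (motive := fun _ => Int) u
    (fun _ ih => match U.find? (fun q => g.getD q 0 == ih) with
      | some q => q
      | none => ih) n
  have hfU : ∀ t, f t ∈ U := by
    intro t
    induction t with
    | zero => exact hu
    | succ t ih => exact (hpick (f t) ih).1
  have hfg : ∀ t, g.getD (f (t + 1)) 0 = f t := fun t => (hpick (f t) (hfU t)).2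
  have hdup : ∃ j, ((List.range j).any (fun i => decide (f i = f j))) = true := by
    obtain ⟨a, ha, b, hb, hne, heq⟩ := Finset.exists_ne_map_eq_of_card_lt_of_maps_to
      (s := Finset.range (U.length + 2)) (t := U.toFinset)
      (by
        have h1 : U.toFinset.card ≤ U.length := List.toFinset_card_le U
        rw [Finset.card_range]
        omega)
      (fun a _ => List.mem_toFinset.mpr (hfU a))
    rcases Nat.lt_or_ge a b with h | h
    · exact ⟨b, List.any_eq_true.mpr ⟨a, List.mem_range.mpr h, by simp [heq]⟩⟩
    · have h' : b < a := by
        rcases Nat.lt_or_ge b a with h2 | h2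
        · exact h2
        · exact absurd (Nat.le_antisymm h h2) (fun hh => hne hh.symm)
      exact ⟨a, List.any_eq_true.mpr ⟨b, List.mem_range.mpr h', by simp [heq]⟩⟩
  have hspec := Nat.find_spec hdup
  obtain ⟨i0, hi0r, hi0e⟩ := List.any_eq_true.mp hspec
  have hi0lt : i0 < Nat.find hdup := List.mem_range.mp hi0r
  have hi0eq : f i0 = f (Nat.find hdup) := of_decide_eq_true hi0e
  have hi00 : i0 = 0 := by
    by_contra hne0
    have h1 : 1 ≤ i0 := Nat.one_le_iff_ne_zero.mpr hne0
    have he : f (i0 - 1) = f (Nat.find hdup - 1) := by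
      have e1 := hfg (i0 - 1)
      have e2 := hfg (Nat.find hdup - 1)
      rw [Nat.sub_add_cancel h1] at e1
      rw [Nat.sub_add_cancel (by omega)] at e2
      rw [← e1, ← e2, hi0eq]
    exact Nat.find_min hdup (m := Nat.find hdup - 1) (by omega)
      (List.any_eq_true.mpr ⟨i0 - 1, List.mem_range.mpr (by omega), by simp [he]⟩)
  have hj1 : 1 ≤ Nat.find hdup := by omega
  have hfj0 : f 0 = f (Nat.find hdup) := hi00 ▸ hi0eq
  have hclosed : ∀ w ∈ (List.range (Nat.find hdup)).map f,
      w ∈ g.keys ∧ cyc.contains w = false ∧ g.getD w 0 ∈ (List.range (Nat.find hdup)).map f := by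
    intro w hw
    obtain ⟨t, htr, rfl⟩ := List.mem_map.mp hw
    have ht := List.mem_range.mp htr
    refine ⟨(hUK _ (hfU t)).1, (hUK _ (hfU t)).2, ?_⟩
    cases t with
    | zero =>
      have hstep : g.getD (f 0) 0 = f (Nat.find hdup - 1) := by
        have e2 := hfg (Nat.find hdup - 1)
        rw [Nat.sub_add_cancel hj1] at e2
        rw [hfj0, ← e2]
      rw [hstep]
      exact List.mem_map.mpr ⟨Nat.find hdup - 1, List.mem_range.mpr (by omega), rfl⟩
    | succ t =>
      rw [hfg t]
      exact List.mem_map.mpr ⟨t, List.mem_range.mpr (by omega), rfl⟩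
  intro m
  exact pvForwardClosed_none g cyc _ hclosed m u
    (List.mem_map.mpr ⟨0, List.mem_range.mpr (by omega), rfl⟩)

lemma pvTs0_items (cyc : PySem.Set Int) (h : cyc.Nodup) :
    (cyc.foldl (fun d r => d.insert r (1 : Int)) PySem.Dict.empty).items
      = cyc.map (fun r => (r, (1 : Int))) := by
  rw [PySem.Dict.items_foldl_insert_fresh cyc (fun r => r) (fun _ => (1 : Int))
        PySem.Dict.empty (fun a _ => by simp) (by simpa using h)]
  rw [show (PySem.Dict.empty : PySem.Dict Int Int).items = [] from rfl, List.nil_append]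

-- ---- B-side: the final characterisation matching pvSize_eq ----

lemma pvAltSize_eq (g : PySem.Dict Int Int) (cyc : PySem.Set Int)
    (hk : g.keys.Nodup)
    (Hval : ∀ x y : Int, g.get? x = some y → g.contains y = true)
    (Hcyck : ∀ r : Int, cyc.contains r = true → g.contains r = true)
    (hcycnd : cyc.Nodup) :
    ∀ r : Int, cyc.contains r = true →
      (pvLoopB g cyc (2 * g.size + 1)
          (((pvSize0 g cyc).keys.filter (fun x => (pvIndeg g cyc).getD x 0 == 0)).reverse)
          (pvSize0 g cyc) (pvIndeg g cyc)
          (cyc.foldl (fun d r => d.insert r (1 : Int)) PySem.Dict.empty)).getD r 0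
        = 1 + ((g.keys.countP (fun x => !cyc.contains x &&
            (cyc.contains (pvWalkB g cyc (g.size + 1) x) && (pvWalkB g cyc (g.size + 1) x == r)))) : Int) := by
  intro r hr
  have hsizeK : g.size = g.keys.length := by
    simp [PySem.Dict.size, PySem.Dict.keys]
  have hcK : ∀ c ∈ cyc, c ∈ g.keys := fun c hc =>
    (PySem.Dict.contains_iff_mem_keys g c).mp (Hcyck c ((PySem.Set.contains_iff cyc c).mpr hc))
  have hitems := pvTs0_items cyc hcycnd
  have hts0keys : (cyc.foldl (fun d r => d.insert r (1 : Int)) PySem.Dict.empty).keys = cyc := by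
    simp only [PySem.Dict.keys, hitems, List.map_map]
    simp [Function.comp_def]
  have hts0getD : ∀ c ∈ cyc,
      (cyc.foldl (fun d r => d.insert r (1 : Int)) PySem.Dict.empty).getD c 0 = 1 := by
    intro c hc
    exact PySem.Dict.getD_of_mem_items _ (by rw [hitems]; exact List.mem_map.mpr ⟨c, hc, rfl⟩)
      (by rw [hts0keys]; exact hcycnd) 0
  have hkeys0 := pvSize0_keys g cyc hk
  have hexit0 : ∀ x : Int, pvExit g [] ([] : List Int).length x = some x := by
    intro x
    simp [pvExit]
  have hEinit : ∀ x ∈ g.keys, cyc.contains x = false →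
      ∃ z, pvExit g [] ([] : List Int).length x = some z :=
    fun x _ _ => ⟨x, hexit0 x⟩
  have hP2init : ∀ p ∈ ([] : List Int), p ∈ g.keys ∧ cyc.contains p = false :=
    fun p hp => absurd hp (List.not_mem_nil)
  have hI8init : ∀ p ∈ ([] : List Int), ∀ q ∈ g.keys,
      cyc.contains q = false → q ∉ ([] : List Int) → g.getD q 0 ≠ p :=
    fun p hp => absurd hp (List.not_mem_nil)
  have hI3init : ∀ v : Int, cyc.contains v = false → (pvIndeg g cyc).getD v 0
      = (g.keys.countP (fun q => !cyc.contains q && decide (q ∉ ([] : List Int))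
          && (g.getD q 0 == v)) : Int) := by
    intro v _
    rw [pvIndeg_getD g cyc hk hcycnd hcK v]
    have hcc : g.keys.countP (fun q => !cyc.contains q && (g.getD q 0 == v))
        = g.keys.countP (fun q => !cyc.contains q && decide (q ∉ ([] : List Int))
            && (g.getD q 0 == v)) := by
      refine List.countP_congr ?_
      intro q _
      simp
    exact_mod_cast hcc
  have hI4init : ∀ v ∈ g.keys, cyc.contains v = false → v ∉ ([] : List Int) →
      (v ∈ ((pvSize0 g cyc).keys.filter (fun x => (pvIndeg g cyc).getD x 0 == 0)).reverse
        ↔ (pvIndeg g cyc).getD v 0 = 0) := by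
    intro v hvK hvC _
    rw [List.mem_reverse, List.mem_filter, hkeys0]
    constructor
    · rintro ⟨_, h2⟩
      exact beq_iff_eq.mp h2
    · intro h
      exact ⟨List.mem_filter.mpr ⟨hvK, by rw [hvC]; rfl⟩, beq_iff_eq.mpr h⟩
  have hS1init : (((pvSize0 g cyc).keys.filter
      (fun x => (pvIndeg g cyc).getD x 0 == 0)).reverse).Nodup := by
    rw [List.nodup_reverse]
    refine List.Nodup.filter _ ?_
    rw [hkeys0]
    exact hk.filter _
  have hS2init : ∀ x ∈ ((pvSize0 g cyc).keys.filter
      (fun x => (pvIndeg g cyc).getD x 0 == 0)).reverse,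
      x ∈ g.keys ∧ cyc.contains x = false ∧ x ∉ ([] : List Int) := by
    intro x hx
    rw [List.mem_reverse, List.mem_filter, hkeys0] at hx
    obtain ⟨hx1, _⟩ := hx
    obtain ⟨hxK, hxC⟩ := List.mem_filter.mp hx1
    exact ⟨hxK, (by simpa using hxC), List.not_mem_nil⟩
  have hI6init : ∀ v ∈ g.keys, cyc.contains v = false → v ∉ ([] : List Int) →
      (pvSize0 g cyc).getD v 0 = (g.keys.countP (fun x => !cyc.contains x
        && (pvExit g [] ([] : List Int).length x == some v)) : Int) := by
    intro v hvK hvC _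
    rw [pvSize0_getD g cyc hvK hvC]
    have hcc : g.keys.countP (fun x => !cyc.contains x
        && (pvExit g [] ([] : List Int).length x == some v)) = 1 := by
      have hcg : g.keys.countP (fun x => !cyc.contains x
          && (pvExit g [] ([] : List Int).length x == some v))
          = g.keys.countP (fun x => x == v) := by
        refine List.countP_congr ?_
        intro x _
        rw [hexit0 x]
        by_cases hxv : x = v
        · rw [hxv, hvC]
          simp
        · have h1 : (some x == some v) = false := by
            simp only [beq_eq_false_iff_ne, ne_eq, Option.some.injEq]
            exact hxv
          have h2 : (x == v) = false := by simp [hxv]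
          rw [h1, h2]
          simp
      rw [hcg]
      have he : g.keys.countP (fun x => x == v) = g.keys.count v := rfl
      have h1 : g.keys.count v ≤ 1 := List.nodup_iff_count_le_one.mp hk v
      have h2 : 0 < g.keys.count v := List.count_pos_iff.mpr hvK
      omega
    rw [hcc]
    rfl
  have hI7init : ∀ r' : Int, cyc.contains r' = true →
      (cyc.foldl (fun d r => d.insert r (1 : Int)) PySem.Dict.empty).getD r' 0
        = 1 + (g.keys.countP (fun x => !cyc.contains x
            && (pvExit g [] ([] : List Int).length x == some r')) : Int) := by
    intro r' hr'
    have hcc : g.keys.countP (fun x => !cyc.contains x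
        && (pvExit g [] ([] : List Int).length x == some r')) = 0 := by
      refine List.countP_eq_zero.mpr ?_
      intro x _
      rw [hexit0 x]
      by_cases hxr : x = r'
      · rw [hxr, hr']
        simp
      · have h1 : (some x == some r') = false := by
          simp only [beq_eq_false_iff_ne, ne_eq, Option.some.injEq]
          exact hxr
        rw [h1]
        simp
    rw [hts0getD r' ((PySem.Set.contains_iff cyc r').mp hr'), hcc]
    rfl
  have hmeasinit : (g.keys.filter (fun z => !cyc.contains z
        && decide (z ∉ ([] : List Int)))).length
      + ((g.keys.filter (fun z => !cyc.contains z && decide (z ∉ ([] : List Int)))).filter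
          (fun z => decide (z ∉ ((pvSize0 g cyc).keys.filter
            (fun x => (pvIndeg g cyc).getD x 0 == 0)).reverse))).length
      ≤ 2 * g.size + 1 := by
    have h1 := List.length_filter_le (fun z => !cyc.contains z
      && decide (z ∉ ([] : List Int))) g.keys
    have h2 := List.length_filter_le (fun z => decide (z ∉ ((pvSize0 g cyc).keys.filter
      (fun x => (pvIndeg g cyc).getD x 0 == 0)).reverse))
      (g.keys.filter (fun z => !cyc.contains z && decide (z ∉ ([] : List Int))))
    omega
  obtain ⟨P', hN, hA, hB, hC, hD⟩ := pvLoopB_main g cyc hk Hval (2 * g.size + 1)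
    (((pvSize0 g cyc).keys.filter (fun x => (pvIndeg g cyc).getD x 0 == 0)).reverse)
    (pvSize0 g cyc) (pvIndeg g cyc)
    (cyc.foldl (fun d r => d.insert r (1 : Int)) PySem.Dict.empty) []
    hmeasinit hS1init hS2init List.nodup_nil hP2init hI8init hI3init hI4init hEinit
    hI6init hI7init
  rw [hD r hr]
  have hPlen : P'.length ≤ g.size := by
    rw [hsizeK]
    exact (List.subperm_of_subset hN (fun p hp => (hA p hp).1)).length_le
  have hcc : g.keys.countP (fun x => !cyc.contains x && (pvExit g P' P'.length x == some r))
      = g.keys.countP (fun x => !cyc.contains x &&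
          (cyc.contains (pvWalkB g cyc (g.size + 1) x)
            && (pvWalkB g cyc (g.size + 1) x == r))) := by
    refine List.countP_congr ?_
    intro x hxK
    by_cases hcxT : cyc.contains x = true
    · rw [hcxT]
      simp
    · have hcx' : cyc.contains x = false := by
        cases hcc2 : cyc.contains x
        · rfl
        · exact absurd hcc2 hcxT
      obtain ⟨z, hz⟩ := hB x hxK hcx'
      have hzP' : z ∉ P' := pvExit_some_not_mem hz
      have hzK : z ∈ g.keys := pvExit_mem_keys Hval hxK hz
      rw [hcx', hz]
      by_cases hCz : cyc.contains z = true
      · obtain ⟨m, hm, hw⟩ := pvExit_to_pvWalkN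
          (fun p hp => ⟨(hA p hp).1, (hA p hp).2⟩) hz hCz
        have hwb : pvWalkB g cyc (g.size + 1) x = z := pvWalkB_of_pvWalkN hw (by omega)
        rw [hwb, hCz]
        simp
      · have hCz' : cyc.contains z = false := by
          cases hcc2 : cyc.contains z
          · rfl
          · exact absurd hcc2 hCz
        have hzU : z ∈ g.keys.filter (fun u => !cyc.contains u && decide (u ∉ P')) :=
          List.mem_filter.mpr ⟨hzK, by rw [hCz']; simp [hzP']⟩
        have hnone := pvPredClosed_none g cyc
          (g.keys.filter (fun u => !cyc.contains u && decide (u ∉ P')))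
          (hk.filter _)
          (by
            intro u hu
            obtain ⟨huK, hub⟩ := List.mem_filter.mp hu
            simp only [Bool.and_eq_true, Bool.not_eq_true'] at hub
            exact ⟨huK, hub.1⟩)
          (by
            intro u hu
            obtain ⟨huK, hub⟩ := List.mem_filter.mp hu
            simp only [Bool.and_eq_true, Bool.not_eq_true', decide_eq_true_eq] at hub
            obtain ⟨q, hqK, hqC, hqP', hgq⟩ := hC u huK hub.1 hub.2
            exact ⟨q, List.mem_filter.mpr ⟨hqK, by rw [hqC]; simp [hqP']⟩, hgq⟩)
          z hzU
        have hxnone : ∀ m, pvWalkN g cyc m x = none :=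
          pvWalkN_none_of_exit (fun p hp => ⟨(hA p hp).1, (hA p hp).2⟩) hz hnone
        have hnotC : cyc.contains (pvWalkB g cyc (g.size + 1) x) = false := by
          cases hcc2 : cyc.contains (pvWalkB g cyc (g.size + 1) x)
          · rfl
          · exfalso
            have hw := pvWalkN_of_pvWalkB Hval
              ((PySem.Dict.contains_iff_mem_keys g x).mpr hxK) hcc2
            rw [hxnone (g.size + 1)] at hw
            exact absurd hw (by simp)
        rw [hnotC]
        have hzr : (some z == some r) = false := by
          simp only [beq_eq_false_iff_ne, ne_eq, Option.some.injEq]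
          intro h
          rw [h] at hCz'
          rw [hr] at hCz'
          exact absurd hCz' (by simp)
        rw [hzr]
        simp
  omega

-- ===== VERDICT (by name: the statement is the Claim_ definition above) =====
theorem compute_tree_sizes_spec : Claim_equal_compute_tree_sizes := by
  intro graph cycles _ hpre
  unfold Spec_compute_tree_sizes
  unfold Pre_compute_tree_sizes at hpre
  simp only [Bool.and_eq_true, List.all_eq_true] at hpre
  obtain ⟨hvals, hcycs⟩ := hpre
  show compute_tree_sizes graph cycles = compute_tree_sizes_alt graph cycles
  have hk : (PySem.Dict.ofList graph).keys.Nodup := PySem.Dict.nodup_keys_ofList graph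
  have hcycnd : (pvCycleSet cycles).Nodup := pvCycleSet_nodup cycles
  have Hval : ∀ x y : Int, (PySem.Dict.ofList graph).get? x = some y →
      (PySem.Dict.ofList graph).contains y = true := by
    intro x y hxy
    have hmem := (PySem.Dict.get?_eq_some_iff_mem_items _ x y hk).mp hxy
    refine hvals y ?_
    simp only [PySem.Dict.values]
    exact List.mem_map.mpr ⟨(x, y), hmem, rfl⟩
  have Hcyck : ∀ r : Int, (pvCycleSet cycles).contains r = true →
      (PySem.Dict.ofList graph).contains r = true := by
    intro r hrc
    obtain ⟨c, hc, hrcm⟩ := (pvCycleSet_mem cycles r).mp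
      ((PySem.Set.contains_iff _ r).mp hrc)
    exact hcycs c hc r hrcm
  simp only [compute_tree_sizes, compute_tree_sizes_alt]
  rw [PySem.Dict.items_foldl_insert_fresh (pvCycleSet cycles) (fun node => node)
        (fun node => (pvDfsA (pvRev (PySem.Dict.ofList graph)) (pvCycleSet cycles)
          (2 * (PySem.Dict.ofList graph).size + 1) [node] (PySem.Set.ofList [node]) 0).1)
        PySem.Dict.empty (fun a _ => by simp) (by simpa using hcycnd)]
  rw [show (PySem.Dict.empty : PySem.Dict Int Int).items = [] from rfl, List.nil_append]
  have hitems := pvTs0_items (pvCycleSet cycles) hcycnd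
  have hts0keys : ((pvCycleSet cycles).foldl (fun d r => d.insert r (1 : Int))
      PySem.Dict.empty).keys = pvCycleSet cycles := by
    simp only [PySem.Dict.keys, hitems, List.map_map]
    simp [Function.comp_def]
  have hts0cont : ∀ c : Int, (pvCycleSet cycles).contains c = true →
      ((pvCycleSet cycles).foldl (fun d r => d.insert r (1 : Int))
        PySem.Dict.empty).contains c = true := by
    intro c hc
    rw [PySem.Dict.contains_iff_mem_keys, hts0keys]
    exact (PySem.Set.contains_iff _ c).mp hc
  have hkeysfin := pvLoopB_keys (PySem.Dict.ofList graph) (pvCycleSet cycles)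
    (2 * (PySem.Dict.ofList graph).size + 1)
    (((pvSize0 (PySem.Dict.ofList graph) (pvCycleSet cycles)).keys.filter
      (fun x => (pvIndeg (PySem.Dict.ofList graph) (pvCycleSet cycles)).getD x 0 == 0)).reverse)
    (pvSize0 (PySem.Dict.ofList graph) (pvCycleSet cycles))
    (pvIndeg (PySem.Dict.ofList graph) (pvCycleSet cycles))
    ((pvCycleSet cycles).foldl (fun d r => d.insert r (1 : Int)) PySem.Dict.empty) hts0cont
  conv_rhs => rw [PySem.Dict.items_eq_map_keys _ (by rw [hkeysfin, hts0keys]; exact hcycnd) 0]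
  rw [hkeysfin, hts0keys]
  refine List.map_congr_left ?_
  intro rt hrt
  rw [pvAltSize_eq (PySem.Dict.ofList graph) (pvCycleSet cycles) hk Hval Hcyck hcycnd rt
        ((PySem.Set.contains_iff _ rt).mpr hrt)]
  rw [pvSize_eq (PySem.Dict.ofList graph) (pvCycleSet cycles) rt hk Hval
        (Hcyck rt ((PySem.Set.contains_iff _ rt).mpr hrt))
        ((PySem.Set.contains_iff _ rt).mpr hrt)]
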